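-- pv_equiv track=rewrite | github.com/Ag3497120/verantyx-v6 | synth_results/a2d730bd.py | transform
-- ===== SOURCE A (Python) =====
-- def transform(grid):
--     from collections import Counter, deque
--     rows = len(grid)
--     cols = len(grid[0])
--     flat = [v for row in grid for v in row]
--     bg = Counter(flat).most_common(1)[0][0]
--
--     # Find connected regions per value
--     visited = [[False]*cols for _ in range(rows)]
--     regions = {}  # value -> list of region-cells-lists
--
--     for r in range(rows):
--         for c in range(cols):
--             if not visited[r][c] and grid[r][c] != bg:
--                 q = deque([(r, c)])
--                 visited[r][c] = True
--                 cells = [(r, c)]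
--                 v = grid[r][c]
--                 while q:
--                     cr, cc = q.popleft()
--                     for dr2, dc2 in [(-1,0),(1,0),(0,-1),(0,1)]:
--                         nr, nc = cr+dr2, cc+dc2
--                         if 0<=nr<rows and 0<=nc<cols and not visited[nr][nc] and grid[nr][nc] == v:
--                             visited[nr][nc] = True
--                             q.append((nr, nc))
--                             cells.append((nr, nc))
--                 if v not in regions:
--                     regions[v] = []
--                 regions[v].append(cells)
--
--     result = [row[:] for row in grid]
--
--     for v, rlist in regions.items():
--         if len(rlist) < 2:
--             continue
--         # Sort by size - largest is block
--         rlist.sort(key=lambda x: -len(x))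
--         block_cells = set(map(tuple, rlist[0]))
--         isolated_list = rlist[1:]  # smaller regions
--
--         for isolated_cells in isolated_list:
--             if len(isolated_cells) != 1:
--                 continue  # only handle single cells for now
--             ir, ic = isolated_cells[0]
--
--             # Find direction toward block (nearest block cell)
--             block_rows = [r for r,c in block_cells]
--             block_cols = [c for r,c in block_cells]
--             br_min, br_max = min(block_rows), max(block_rows)
--             bc_min, bc_max = min(block_cols), max(block_cols)
--
--             # Determine direction (horizontal or vertical)
--             if ir < br_min:
--                 dr2, dc2 = 1, 0  # go down
--             elif ir > br_max:
--                 dr2, dc2 = -1, 0  # go up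
--             elif ic < bc_min:
--                 dr2, dc2 = 0, 1  # go right
--             elif ic > bc_max:
--                 dr2, dc2 = 0, -1  # go left
--             else:
--                 continue
--
--             # Move from isolated cell toward block until hitting it
--             # Erase start
--             result[ir][ic] = bg
--
--             # Trace path
--             r, c = ir, ic
--             path = []
--             while True:
--                 nr, nc = r + dr2, c + dc2
--                 if not (0 <= nr < rows and 0 <= nc < cols):
--                     break
--                 if (nr, nc) in block_cells:
--                     break  # stop before block
--                 path.append((nr, nc))
--                 r, c = nr, nc
--
--             # Mark path
--             for pr, pc in path:
--                 result[pr][pc] = v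
--
--             # Start arms (perpendicular and backward)
--             back_dir = (-dr2, -dc2)
--             perp_dirs = [(dc2, dr2), (-dc2, -dr2)]
--             for ard, acd in [back_dir] + perp_dirs:
--                 nr2, nc2 = ir + ard, ic + acd
--                 if 0 <= nr2 < rows and 0 <= nc2 < cols and result[nr2][nc2] == bg:
--                     result[nr2][nc2] = v
--
--             # End arms (perpendicular to movement at landing)
--             if path:
--                 lr, lc = path[-1]
--                 for ard, acd in perp_dirs:
--                     nr2, nc2 = lr + ard, lc + acd
--                     if 0 <= nr2 < rows and 0 <= nc2 < cols and result[nr2][nc2] == bg: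
--                         result[nr2][nc2] = v
--
--     return result
-- ===== SOURCE B (Python) =====
-- def transform(grid):
--     from collections import Counter
--     rows = len(grid)
--     cols = len(grid[0])
--     flat = [v for row in grid for v in row]
--     bg = Counter(flat).most_common(1)[0][0]
--
--     # Label connected regions with union-find over flattened cell indices:
--     # union each non-background cell with its right and down neighbour of equal value.
--     n = rows * cols
--     parent = list(range(n))
--
--     def find(x):
--         while parent[x] != x:
--             x = parent[x]
--         return x
--
--     def union(a, b):
--         ra, rb = find(a), find(b)
--         if ra < rb:
--             parent[rb] = ra
--         elif rb < ra:
--             parent[ra] = rb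
--
--     for r in range(rows):
--         for c in range(cols):
--             v = grid[r][c]
--             if v == bg:
--                 continue
--             if c + 1 < cols and grid[r][c + 1] == v:
--                 union(r * cols + c, r * cols + c + 1)
--             if r + 1 < rows and grid[r + 1][c] == v:
--                 union(r * cols + c, (r + 1) * cols + c)
--
--     # Bucket cells by root; a component appears when its row-major-minimal cell
--     # (= its root, since unions attach the larger root below the smaller) is reached.
--     comps = {}
--     for r in range(rows):
--         for c in range(cols):
--             if grid[r][c] == bg:
--                 continue
--             comps.setdefault(find(r * cols + c), []).append((r, c))
--
--     # Group components by value, in discovery order.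
--     regions = {}
--     for cells in comps.values():
--         r0, c0 = cells[0]
--         regions.setdefault(grid[r0][c0], []).append(cells)
--
--     result = [row[:] for row in grid]
--
--     for v, rlist in regions.items():
--         if len(rlist) < 2:
--             continue
--         # Sort by size - largest is block
--         rlist.sort(key=lambda x: -len(x))
--         block_cells = set(map(tuple, rlist[0]))
--         isolated_list = rlist[1:]  # smaller regions
--
--         for isolated_cells in isolated_list:
--             if len(isolated_cells) != 1:
--                 continue  # only handle single cells for now
--             ir, ic = isolated_cells[0]
--
--             block_rows = [r for r, c in block_cells]
--             block_cols = [c for r, c in block_cells]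
--             br_min, br_max = min(block_rows), max(block_rows)
--             bc_min, bc_max = min(block_cols), max(block_cols)
--
--             if ir < br_min:
--                 dr2, dc2 = 1, 0
--             elif ir > br_max:
--                 dr2, dc2 = -1, 0
--             elif ic < bc_min:
--                 dr2, dc2 = 0, 1
--             elif ic > bc_max:
--                 dr2, dc2 = 0, -1
--             else:
--                 continue
--
--             result[ir][ic] = bg
--
--             r, c = ir, ic
--             path = []
--             while True:
--                 nr, nc = r + dr2, c + dc2
--                 if not (0 <= nr < rows and 0 <= nc < cols):
--                     break
--                 if (nr, nc) in block_cells: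
--                     break
--                 path.append((nr, nc))
--                 r, c = nr, nc
--
--             for pr, pc in path:
--                 result[pr][pc] = v
--
--             back_dir = (-dr2, -dc2)
--             perp_dirs = [(dc2, dr2), (-dc2, -dr2)]
--             for ard, acd in [back_dir] + perp_dirs:
--                 nr2, nc2 = ir + ard, ic + acd
--                 if 0 <= nr2 < rows and 0 <= nc2 < cols and result[nr2][nc2] == bg:
--                     result[nr2][nc2] = v
--
--             if path:
--                 lr, lc = path[-1]
--                 for ard, acd in perp_dirs:
--                     nr2, nc2 = lr + ard, lc + acd
--                     if 0 <= nr2 < rows and 0 <= nc2 < cols and result[nr2][nc2] == bg: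
--                         result[nr2][nc2] = v
--     return result
-- ===== Notes on version B (the rewrite author's own statement) =====
-- stated objective: alternative
-- what changed: B replaces A's BFS flood fill (global visited matrix + per-seed deque) by union-find connected-component labeling: one pass unions each non-background cell with its equal-valued right/down neighbours (attaching the larger root under the smaller, so a component's root is its row-major-minimal cell), then a row-major bucketing pass groups cells by root, which reproduces A's discovery order; the downstream block/path/arm drawing phase is kept identical.
-- outside the precondition, e.g. on transform([]): A raises IndexError, B raises IndexError
import Mathlib
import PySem

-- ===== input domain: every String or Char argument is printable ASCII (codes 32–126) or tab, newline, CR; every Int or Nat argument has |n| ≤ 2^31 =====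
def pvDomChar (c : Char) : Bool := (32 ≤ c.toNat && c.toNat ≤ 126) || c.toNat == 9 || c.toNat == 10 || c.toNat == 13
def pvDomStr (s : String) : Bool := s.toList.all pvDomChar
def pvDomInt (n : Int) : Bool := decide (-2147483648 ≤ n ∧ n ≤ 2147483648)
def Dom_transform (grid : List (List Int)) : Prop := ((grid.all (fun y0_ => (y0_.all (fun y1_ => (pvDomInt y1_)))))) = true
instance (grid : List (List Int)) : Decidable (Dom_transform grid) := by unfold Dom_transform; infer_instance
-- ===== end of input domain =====

-- B replaces A's BFS flood fill by union-find component labeling (larger root attached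
-- under the smaller, then row-major bucketing by root); the drawing phase is unchanged.

-- ===== PORT A =====
-- shared low-level helpers: 2-D indexed read/write (Python g[i][j] / g[i][j] = v)
def pvG {α : Type} (xs : List (List α)) (i j : Int) (d : α) : α :=
  PySem.List.pyGetD (PySem.List.pyGetD xs i []) j d

def pvS {α : Type} (xs : List (List α)) (i j : Int) (v : α) : List (List α) :=
  PySem.List.pySetD xs i (PySem.List.pySetD (PySem.List.pyGetD xs i []) j v)

def pvDirs : List (Int × Int) := [(-1, 0), (1, 0), (0, -1), (0, 1)]

-- A's four-neighbour visit step
-- ('for dr2, dc2 in [...]: if in bounds and not visited and grid == v: mark, append')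
def pvExpandCell (grid : List (List Int)) (rows cols v : Int)
    (st : List (List Bool) × List (Int × Int)) (cr cc : Int) :
    List (List Bool) × List (Int × Int) :=
  pvDirs.foldl (fun st d =>
    let nr := cr + d.1
    let nc := cc + d.2
    if 0 ≤ nr ∧ nr < rows ∧ 0 ≤ nc ∧ nc < cols ∧ pvG st.1 nr nc false = false ∧
        pvG grid nr nc 0 = v then
      (pvS st.1 nr nc true, st.2 ++ [(nr, nc)])
    else st) st

-- A's BFS: 'while q: cr, cc = q.popleft(); <visit the 4 neighbours>' (fuel = one unit per dequeue)
def pvBfsA (grid : List (List Int)) (rows cols v : Int) :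
    Nat → List (List Bool) → List (Int × Int) → List (Int × Int) →
    List (List Bool) × List (Int × Int)
  | 0, vis, _, cells => (vis, cells)
  | _ + 1, vis, [], cells => (vis, cells)
  | n + 1, vis, c :: rest, cells =>
      let p := pvExpandCell grid rows cols v (vis, []) c.1 c.2
      pvBfsA grid rows cols v n p.1 (rest ++ p.2) (cells ++ p.2)

-- number of unvisited cells (fuel bound for the flood fill)
def pvUnvis (vis : List (List Bool)) : Nat := (vis.map (fun r => r.count false)).sum

-- one cell of A's scan: 'if not visited[r][c] and grid[r][c] != bg: <BFS>; regions[v].append(cells)'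
def pvCellStepA (grid : List (List Int)) (rows cols bg : Int)
    (st : List (List Bool) × PySem.Dict Int (List (List (Int × Int)))) (r c : Int) :
    List (List Bool) × PySem.Dict Int (List (List (Int × Int))) :=
  if pvG st.1 r c false = false ∧ pvG grid r c 0 ≠ bg then
    let v := pvG grid r c 0
    let vis1 := pvS st.1 r c true
    let res := pvBfsA grid rows cols v (pvUnvis vis1 + 1) vis1 [(r, c)] [(r, c)]
    let d1 := if st.2.contains v then st.2 else st.2.insert v []
    (res.1, d1.modify v [] (· ++ [res.2]))
  else st

-- A's scan: 'visited = [[False]*cols ...]; for r in range(rows): for c in range(cols): ...'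
def pvScanA (grid : List (List Int)) (rows cols bg : Int) :
    List (List Bool) × PySem.Dict Int (List (List (Int × Int))) :=
  let vis0 := (PySem.List.pyRange 0 rows 1).map (fun _ => List.replicate cols.toNat false)
  (PySem.List.pyRange 0 rows 1).foldl (fun st r =>
    (PySem.List.pyRange 0 cols 1).foldl (fun st c => pvCellStepA grid rows cols bg st r c) st)
    (vis0, PySem.Dict.empty)

-- bounding box of the block (min/max row and column of block_cells)
def pvBbox (bcells : List (Int × Int)) : Int × Int × Int × Int :=
  ((PySem.List.min? (bcells.map (·.1)) (fun x => x)).getD 0,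
   (PySem.List.max? (bcells.map (·.1)) (fun x => x)).getD 0,
   (PySem.List.min? (bcells.map (·.2)) (fun x => x)).getD 0,
   (PySem.List.max? (bcells.map (·.2)) (fun x => x)).getD 0)

-- the 'while True' path trace (one unit of fuel per step; the walk is monotone in one
-- coordinate, so rows+cols+2 units never run out)
def pvTrace (rows cols : Int) (bcells : PySem.Set (Int × Int)) (dr dc : Int) :
    Nat → Int → Int → List (Int × Int) → List (Int × Int)
  | 0, _, _, path => path
  | n + 1, r, c, path =>
      let nr := r + dr
      let nc := c + dc
      if ¬(0 ≤ nr ∧ nr < rows ∧ 0 ≤ nc ∧ nc < cols) then path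
      else if bcells.contains (nr, nc) then path
      else pvTrace rows cols bcells dr dc n nr nc (path ++ [(nr, nc)])

-- the drawing block both Pythons perform for one isolated single cell:
-- direction choice, erase start, trace path, mark it, start arms, end arms
def pvDraw (rows cols bg v : Int) (bcells : PySem.Set (Int × Int))
    (bb : Int × Int × Int × Int) (res : List (List Int)) (start : Int × Int) :
    List (List Int) :=
  let ir := start.1
  let ic := start.2
  let brmin := bb.1
  let brmax := bb.2.1
  let bcmin := bb.2.2.1
  let bcmax := bb.2.2.2
  let dd : Option (Int × Int) :=
    if ir < brmin then some (1, 0)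
    else if ir > brmax then some (-1, 0)
    else if ic < bcmin then some (0, 1)
    else if ic > bcmax then some (0, -1)
    else none
  match dd with
  | none => res
  | some (dr, dc) =>
    let res1 := pvS res ir ic bg
    let path := pvTrace rows cols bcells dr dc ((rows + cols).toNat + 2) ir ic []
    let res2 := path.foldl (fun acc pc => pvS acc pc.1 pc.2 v) res1
    let res3 := [(-dr, -dc), (dc, dr), (-dc, -dr)].foldl (fun acc a =>
      let nr2 := ir + a.1
      let nc2 := ic + a.2
      if 0 ≤ nr2 ∧ nr2 < rows ∧ 0 ≤ nc2 ∧ nc2 < cols ∧ pvG acc nr2 nc2 0 = bg then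
        pvS acc nr2 nc2 v
      else acc) res2
    if path ≠ [] then
      let last := PySem.List.pyGetD path (-1) (0, 0)
      [(dc, dr), (-dc, -dr)].foldl (fun acc a =>
        let nr2 := last.1 + a.1
        let nc2 := last.2 + a.2
        if 0 ≤ nr2 ∧ nr2 < rows ∧ 0 ≤ nc2 ∧ nc2 < cols ∧ pvG acc nr2 nc2 0 = bg then
          pvS acc nr2 nc2 v
        else acc) res3
    else res3

-- the per-value phase (identical lines in both Pythons): stable sort by -len,
-- block = first, isolated = rest, draw singletons
def pvItemStep (rows cols bg : Int) (res : List (List Int))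
    (p : Int × List (List (Int × Int))) : List (List Int) :=
  if PySem.List.len p.2 < 2 then res
  else
    let s := PySem.List.sorted p.2 (fun x => -(PySem.List.len x))
    let block := PySem.List.pyGetD s 0 []
    let bcells : PySem.Set (Int × Int) := PySem.Set.ofList block
    (PySem.List.slice s (some 1) none).foldl (fun res cells =>
      if PySem.List.len cells ≠ 1 then res
      else pvDraw rows cols bg p.1 bcells (pvBbox bcells) res
        (PySem.List.pyGetD cells 0 (0, 0))) res

def transform (grid : List (List Int)) : List (List Int) :=
  let rows := PySem.List.len grid
  let cols := PySem.List.len (PySem.List.pyGetD grid 0 [])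
  let flat := grid.foldl (fun acc row => acc ++ row) []
  let bg := (PySem.List.pyGetD
    (PySem.List.sorted (PySem.Dict.counter flat).items (fun p => -p.2)) 0 (0, 0)).1
  let st := pvScanA grid rows cols bg
  let result := grid.map (fun row => PySem.List.slice row none none)
  st.2.items.foldl (fun res p => pvItemStep rows cols bg res p) result

-- ===== PORT B =====
-- B's union-find 'find': 'while parent[x] != x: x = parent[x]' (fuel = len(parent); the
-- parent chain is strictly decreasing, so len(parent) steps never run out)
def ufFind (parent : List Int) : Nat → Int → Int
  | 0, x => x
  | fuel + 1, x =>
      if PySem.List.pyGetD parent x 0 ≠ x then ufFind parent fuel (PySem.List.pyGetD parent x 0)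
      else x

-- B's 'union': attach the larger root under the smaller
def ufUnion (parent : List Int) (a b : Int) : List Int :=
  let ra := ufFind parent parent.length a
  let rb := ufFind parent parent.length b
  if ra < rb then PySem.List.pySetD parent rb ra
  else if rb < ra then PySem.List.pySetD parent ra rb
  else parent

-- B's union pass: union each non-background cell with its right/down equal neighbours
def pvUnionPass (grid : List (List Int)) (rows cols bg : Int) : List Int :=
  (PySem.List.pyRange 0 rows 1).foldl (fun par r =>
    (PySem.List.pyRange 0 cols 1).foldl (fun par c =>
      let v := pvG grid r c 0
      if v = bg then par
      else
        let par1 := if c + 1 < cols ∧ pvG grid r (c + 1) 0 = v then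
            ufUnion par (r * cols + c) (r * cols + c + 1) else par
        if r + 1 < rows ∧ pvG grid (r + 1) c 0 = v then
            ufUnion par1 (r * cols + c) ((r + 1) * cols + c) else par1) par)
    (PySem.List.pyRange 0 (rows * cols) 1)

-- B's bucketing pass: 'comps.setdefault(find(r*cols+c), []).append((r, c))'
def pvBucket (grid : List (List Int)) (rows cols bg : Int) (parent : List Int) :
    PySem.Dict Int (List (Int × Int)) :=
  (PySem.List.pyRange 0 rows 1).foldl (fun d r =>
    (PySem.List.pyRange 0 cols 1).foldl (fun d c =>
      if pvG grid r c 0 = bg then d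
      else
        let root := ufFind parent parent.length (r * cols + c)
        (d.setdefault root []).modify root [] (· ++ [(r, c)])) d) PySem.Dict.empty

-- B's grouping pass: 'regions.setdefault(grid[r0][c0], []).append(cells)'
def pvGroup (grid : List (List Int)) (comps : PySem.Dict Int (List (Int × Int))) :
    PySem.Dict Int (List (List (Int × Int))) :=
  comps.values.foldl (fun d cells =>
    let p0 := PySem.List.pyGetD cells 0 (0, 0)
    let v := pvG grid p0.1 p0.2 0
    (d.setdefault v []).modify v [] (· ++ [cells])) PySem.Dict.empty

def transform_alt (grid : List (List Int)) : List (List Int) :=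
  let rows := PySem.List.len grid
  let cols := PySem.List.len (PySem.List.pyGetD grid 0 [])
  let flat := grid.foldl (fun acc row => acc ++ row) []
  let bg := (PySem.List.pyGetD
    (PySem.List.sorted (PySem.Dict.counter flat).items (fun p => -p.2)) 0 (0, 0)).1
  let parent := pvUnionPass grid rows cols bg
  let comps := pvBucket grid rows cols bg parent
  let regions := pvGroup grid comps
  let result := grid.map (fun row => PySem.List.slice row none none)
  regions.items.foldl (fun res p => pvItemStep rows cols bg res p) result

-- ===== PRECONDITION & SPEC =====
-- Pre_ excludes exactly the inputs on which the Python A raises: an empty grid (len(grid[0])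
-- IndexError), a grid whose rows are all empty (Counter([]).most_common(1)[0] IndexError), and
-- a grid with a row shorter than the first row (grid[r][c] IndexError during the scan).
def Pre_transform (grid : List (List Int)) : Prop :=
  grid ≠ [] ∧ (∀ row ∈ grid, grid.headI.length ≤ row.length) ∧ grid.flatten ≠ []
instance (grid : List (List Int)) : Decidable (Pre_transform grid) := by
  unfold Pre_transform; infer_instance
def pvWitness_transform : List (List Int) := [[0, 0], [0, 1]]
def Spec_transform (grid : List (List Int)) (out : List (List Int)) : Prop := out = transform_alt grid
instance (grid : List (List Int)) (out : List (List Int)) : Decidable (Spec_transform grid out) := by unfold Spec_transform; infer_instance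

-- ===== CLAIM (what is proved, stated in full; the proofs are below) =====
def Claim_equal_transform : Prop := ∀ (grid : List (List Int)), Dom_transform grid → Pre_transform grid → Spec_transform grid (transform grid)

-- ===== LEMMAS AND PROOFS =====


-- ---- shape and unvisited count of the visited matrix ----
def pvShape {α : Type} (R C : Nat) (vis : List (List α)) : Prop :=
  vis.length = R ∧ ∀ row ∈ vis, row.length = C

theorem pvS_eq_set {α : Type} (xs : List (List α)) {i j : Int} (v : α)
    (hi0 : 0 ≤ i) (hi : i < (xs.length : Int)) (hj0 : 0 ≤ j) :
    pvS xs i j v = xs.set i.toNat ((xs[i.toNat]'(by omega)).set j.toNat v) := by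
  unfold pvS
  rw [PySem.List.pyGetD_eq_getElem xs [] hi0 hi, PySem.List.pySetD_of_nonneg _ _ hj0,
    PySem.List.pySetD_of_nonneg _ _ hi0]

theorem pvShape_pvS {α : Type} {R C : Nat} {vis : List (List α)} (hs : pvShape R C vis)
    {i j : Int} (b : α) (hi0 : 0 ≤ i) (hi : i < (R : Int)) (hj0 : 0 ≤ j) :
    pvShape R C (pvS vis i j b) := by
  obtain ⟨hl, hr⟩ := hs
  rw [pvS_eq_set vis b hi0 (by omega) hj0]
  refine ⟨by simpa using hl, ?_⟩
  intro row hrow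
  rcases List.mem_or_eq_of_mem_set hrow with h' | h'
  · exact hr row h'
  · subst h'
    rw [List.length_set]
    exact hr _ (List.getElem_mem _)

theorem pv_count_set_true (row : List Bool) : ∀ (j : Nat), row[j]? = some false →
    (row.set j true).count false + 1 = row.count false := by
  induction row with
  | nil => intro j h; simp at h
  | cons x t ih =>
    intro j h
    cases j with
    | zero =>
      simp only [List.getElem?_cons_zero, Option.some_inj] at h
      subst h
      simp
    | succ n =>
      simp only [List.getElem?_cons_succ] at h
      have := ih n h
      simp only [List.set_cons_succ, List.count_cons]
      omega

theorem pvUnvis_set (vis : List (List Bool)) :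
    ∀ (n : Nat) (row' : List Bool) (h : n < vis.length),
      pvUnvis (vis.set n row') + (vis[n]'h).count false = pvUnvis vis + row'.count false := by
  induction vis with
  | nil => intro n _ h; simp at h
  | cons x t ih =>
    intro n row' h
    cases n with
    | zero => simp only [List.set_cons_zero, pvUnvis, List.map_cons, List.sum_cons,
        List.getElem_cons_zero]; omega
    | succ m =>
      have hm : m < t.length := by simpa using h
      have := ih m row' hm
      simp only [List.set_cons_succ, pvUnvis, List.map_cons, List.sum_cons,
        List.getElem_cons_succ] at *
      omega

-- reading after writing, under a shape hypothesis
theorem pvG_pvS {α : Type} {R C : Nat} {vis : List (List α)} (hs : pvShape R C vis)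
    {i j i' j' : Int} (v d : α)
    (hi0 : 0 ≤ i) (hi : i < (R : Int)) (hj0 : 0 ≤ j) (hj : j < (C : Int))
    (hi'0 : 0 ≤ i') (hi' : i' < (R : Int)) (hj'0 : 0 ≤ j') (hj' : j' < (C : Int)) :
    pvG (pvS vis i j v) i' j' d = if i' = i ∧ j' = j then v else pvG vis i' j' d := by
  have hlen : (vis.length : Int) = (R : Int) := by rw [hs.1]
  have hiN : i.toNat < vis.length := by omega
  have hi'N : i'.toNat < vis.length := by omega
  have hrowlen : ∀ (k : Nat) (hk : k < vis.length), (vis[k]'hk).length = C :=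
    fun k hk => hs.2 _ (List.getElem_mem hk)
  rw [pvS_eq_set vis v hi0 (by omega) hj0]
  unfold pvG
  rw [PySem.List.pyGetD_eq_getElem _ [] hi'0 (by rw [List.length_set]; omega),
    PySem.List.pyGetD_eq_getElem vis [] hi'0 (by omega)]
  rw [List.getElem_set]
  by_cases hii : i.toNat = i'.toNat
  · have hieq : i' = i := by omega
    subst hieq
    rw [if_pos hii]
    have hjN : j.toNat < (vis[i'.toNat]'hi'N).length := by rw [hrowlen _ hi'N]; omega
    rw [PySem.List.pyGetD_eq_getElem _ d hj'0 (by rw [List.length_set, hrowlen _ hi'N]; omega)]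
    rw [List.getElem_set]
    by_cases hjj : j.toNat = j'.toNat
    · have hjeq : j' = j := by omega
      rw [if_pos hjj, if_pos ⟨rfl, hjeq⟩]
    · have hjne : ¬(i' = i' ∧ j' = j) := fun hc => hjj (by omega)
      rw [if_neg hjj, if_neg hjne]
      rw [PySem.List.pyGetD_eq_getElem _ d hj'0 (by rw [hrowlen _ hi'N]; omega)]
  · have hne : ¬(i' = i ∧ j' = j) := fun hc => hii (by omega)
    rw [if_neg hii, if_neg hne]

-- ---- the four-neighbour step: shape is kept, every appended cell was unvisited ----
theorem pvExpandCell_inv (grid : List (List Int)) {R C : Nat} {rows cols v : Int}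
    (hR : (R : Int) = rows) (hC : (C : Int) = cols) (cr cc : Int) :
    ∀ (st : List (List Bool) × List (Int × Int)), pvShape R C st.1 →
      pvShape R C (pvExpandCell grid rows cols v st cr cc).1 ∧
      pvUnvis (pvExpandCell grid rows cols v st cr cc).1 +
        (pvExpandCell grid rows cols v st cr cc).2.length = pvUnvis st.1 + st.2.length := by
  unfold pvExpandCell
  generalize pvDirs = dirs
  induction dirs with
  | nil => exact fun st hs => ⟨hs, rfl⟩
  | cons d ds ih =>
    intro st hs
    simp only [List.foldl_cons]
    set nr := cr + d.1 with hnr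
    set nc := cc + d.2 with hnc
    by_cases hcond : 0 ≤ nr ∧ nr < rows ∧ 0 ≤ nc ∧ nc < cols ∧ pvG st.1 nr nc false = false ∧
        pvG grid nr nc 0 = v
    · rw [if_pos hcond]
      obtain ⟨h1, h2, h3, h4, h5, _⟩ := hcond
      have hlen : (st.1.length : Int) = rows := by rw [hs.1, hR]
      have hnrR : nr < (st.1.length : Int) := by omega
      have hrowmem : st.1[nr.toNat]'(by omega) ∈ st.1 := List.getElem_mem _
      have hrowlen : (st.1[nr.toNat]'(by omega)).length = C := hs.2 _ hrowmem
      have hrowlen' : nc < ((st.1[nr.toNat]'(by omega)).length : Int) := by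
        rw [hrowlen]; omega
      have hg : (st.1[nr.toNat]'(by omega))[nc.toNat]'(by omega) = false := by
        have := h5
        unfold pvG at this
        rwa [PySem.List.pyGetD_eq_getElem st.1 [] h1 hnrR,
          PySem.List.pyGetD_eq_getElem _ false h3 hrowlen'] at this
      have hset : pvS st.1 nr nc true =
          st.1.set nr.toNat ((st.1[nr.toNat]'(by omega)).set nc.toNat true) :=
        pvS_eq_set st.1 true h1 hnrR h3
      have hshape' : pvShape R C (pvS st.1 nr nc true) :=
        pvShape_pvS hs true h1 (by omega) h3
      have hcount : ((st.1[nr.toNat]'(by omega)).set nc.toNat true).count false + 1 =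
          (st.1[nr.toNat]'(by omega)).count false :=
        pv_count_set_true _ nc.toNat (by rw [List.getElem?_eq_getElem (by omega)]; rw [hg])
      have huv := pvUnvis_set st.1 nr.toNat ((st.1[nr.toNat]'(by omega)).set nc.toNat true)
        (by omega)
      obtain ⟨hsh, hacc⟩ := ih (pvS st.1 nr nc true, st.2 ++ [(nr, nc)]) hshape'
      refine ⟨hsh, ?_⟩
      rw [hacc]
      simp only [List.length_append, List.length_cons, List.length_nil]
      rw [hset]
      omega
    · rw [if_neg hcond]
      exact ih st hs

-- proof-side whole-frontier expansion: processes every frontier cell once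
def pvExpandAll (grid : List (List Int)) (rows cols v : Int) :
    List (List Bool) → List (Int × Int) → List (List Bool) × List (Int × Int)
  | vis, [] => (vis, [])
  | vis, c :: t =>
      let p := pvExpandCell grid rows cols v (vis, []) c.1 c.2
      let q := pvExpandAll grid rows cols v p.1 t
      (q.1, p.2 ++ q.2)

theorem pvExpandAll_inv (grid : List (List Int)) {R C : Nat} {rows cols v : Int}
    (hR : (R : Int) = rows) (hC : (C : Int) = cols) :
    ∀ (q : List (Int × Int)) (vis : List (List Bool)), pvShape R C vis →
      pvShape R C (pvExpandAll grid rows cols v vis q).1 ∧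
      pvUnvis (pvExpandAll grid rows cols v vis q).1 +
        (pvExpandAll grid rows cols v vis q).2.length = pvUnvis vis := by
  intro q
  induction q with
  | nil => intro vis hs; exact ⟨hs, by simp [pvExpandAll]⟩
  | cons c t ih =>
    intro vis hs
    obtain ⟨hs1, hacc1⟩ := pvExpandCell_inv grid hR hC c.1 c.2 (vis, []) hs
    obtain ⟨hs2, hacc2⟩ := ih (pvExpandCell grid rows cols v (vis, []) c.1 c.2).1 hs1
    simp only [pvExpandAll]
    refine ⟨hs2, ?_⟩
    simp only [List.length_append]
    simp only [List.length_nil] at hacc1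
    omega

-- proof-side frontier-by-frontier fill (one fuel unit per round)
def pvFill (grid : List (List Int)) (rows cols v : Int) :
    Nat → List (List Bool) → List (Int × Int) → List (Int × Int) →
    List (List Bool) × List (Int × Int)
  | 0, vis, _, cells => (vis, cells)
  | _ + 1, vis, [], cells => (vis, cells)
  | n + 1, vis, f :: fs, cells =>
      let p := pvExpandAll grid rows cols v vis (f :: fs)
      pvFill grid rows cols v n p.1 p.2 (cells ++ p.2)

theorem pvBfsA_nilq (grid : List (List Int)) (rows cols v : Int) (fuel : Nat)
    (vis : List (List Bool)) (cells : List (Int × Int)) :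
    pvBfsA grid rows cols v fuel vis [] cells = (vis, cells) := by
  cases fuel <;> rfl

theorem pvFill_nilq (grid : List (List Int)) (rows cols v : Int) (fuel : Nat)
    (vis : List (List Bool)) (cells : List (Int × Int)) :
    pvFill grid rows cols v fuel vis [] cells = (vis, cells) := by
  cases fuel <;> rfl

-- draining a queue prefix of A's BFS is one whole-frontier expansion
theorem pvBfsA_drain (grid : List (List Int)) (rows cols v : Int) (n : Nat) :
    ∀ (q1 q2 : List (Int × Int)) (vis : List (List Bool)) (cells : List (Int × Int)),
      pvBfsA grid rows cols v (q1.length + n) vis (q1 ++ q2) cells =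
        pvBfsA grid rows cols v n (pvExpandAll grid rows cols v vis q1).1
          (q2 ++ (pvExpandAll grid rows cols v vis q1).2)
          (cells ++ (pvExpandAll grid rows cols v vis q1).2) := by
  intro q1
  induction q1 with
  | nil => intro q2 vis cells; simp [pvExpandAll]
  | cons c t ih =>
    intro q2 vis cells
    have hfuel : (c :: t).length + n = (t.length + n) + 1 := by simp; omega
    rw [hfuel]
    show pvBfsA grid rows cols v ((t.length + n) + 1) vis (c :: (t ++ q2)) cells = _
    simp only [pvBfsA]
    rw [show (t ++ q2) ++ (pvExpandCell grid rows cols v (vis, []) c.1 c.2).2 =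
      t ++ (q2 ++ (pvExpandCell grid rows cols v (vis, []) c.1 c.2).2) from by
        simp [List.append_assoc]]
    rw [ih]
    simp only [pvExpandAll]
    simp [List.append_assoc]

-- A's dequeue-fuelled BFS equals the frontier fill
theorem pvBfs_cross (grid : List (List Int)) {R C : Nat} {rows cols v : Int}
    (hR : (R : Int) = rows) (hC : (C : Int) = cols) :
    ∀ (U : Nat) (vis : List (List Bool)) (f cells : List (Int × Int)) (nB : Nat),
      pvShape R C vis → pvUnvis vis = U → U + 1 ≤ nB →
      pvBfsA grid rows cols v (f.length + U) vis f cells =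
        pvFill grid rows cols v nB vis f cells := by
  intro U
  induction U using Nat.strong_induction_on with
  | _ U ih =>
    intro vis f cells nB hs hU hnB
    cases f with
    | nil => rw [pvBfsA_nilq, pvFill_nilq]
    | cons c t =>
      cases nB with
      | zero => omega
      | succ m =>
        have hdrain := pvBfsA_drain grid rows cols v U (c :: t) [] vis cells
        rw [List.append_nil] at hdrain
        set p := pvExpandAll grid rows cols v vis (c :: t) with hp
        obtain ⟨hsp, haccp⟩ := pvExpandAll_inv grid hR hC (c :: t) vis hs
        rw [← hp] at hsp haccp
        have hrhs : pvFill grid rows cols v (m + 1) vis (c :: t) cells =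
            pvFill grid rows cols v m p.1 p.2 (cells ++ p.2) := by
          simp only [pvFill, hp]
        rw [hdrain, hrhs, List.nil_append]
        by_cases hp2 : p.2 = []
        · rw [hp2, pvBfsA_nilq, pvFill_nilq]
        · have hlen : 1 ≤ p.2.length := List.length_pos_iff.2 hp2
          have hlt : pvUnvis p.1 < U := by omega
          rw [show U = p.2.length + pvUnvis p.1 by omega]
          exact ih (pvUnvis p.1) hlt p.1 p.2 (cells ++ p.2) m hsp rfl (by omega)

-- ---- the cell graph ----
def pvOk (grid : List (List Int)) (rows cols bg : Int) (p : Int × Int) : Prop :=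
  0 ≤ p.1 ∧ p.1 < rows ∧ 0 ≤ p.2 ∧ p.2 < cols ∧ pvG grid p.1 p.2 0 ≠ bg

def pvAdj (p q : Int × Int) : Prop :=
  (p.1 = q.1 ∧ (q.2 = p.2 + 1 ∨ p.2 = q.2 + 1)) ∨
  (p.2 = q.2 ∧ (q.1 = p.1 + 1 ∨ p.1 = q.1 + 1))

def pvE (grid : List (List Int)) (rows cols bg : Int) (p q : Int × Int) : Prop :=
  pvOk grid rows cols bg p ∧ pvOk grid rows cols bg q ∧
  pvG grid p.1 p.2 0 = pvG grid q.1 q.2 0 ∧ pvAdj p q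

def pvConn (grid : List (List Int)) (rows cols bg : Int) : (Int × Int) → (Int × Int) → Prop :=
  Relation.ReflTransGen (pvE grid rows cols bg)

theorem pvE_symm (grid : List (List Int)) (rows cols bg : Int) {p q : Int × Int}
    (h : pvE grid rows cols bg p q) : pvE grid rows cols bg q p := by
  obtain ⟨h1, h2, h3, h4⟩ := h
  exact ⟨h2, h1, h3.symm, by unfold pvAdj at h4 ⊢; tauto⟩

theorem pvConn_symm (grid : List (List Int)) (rows cols bg : Int) {p q : Int × Int}
    (h : pvConn grid rows cols bg p q) : pvConn grid rows cols bg q p := by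
  induction h with
  | refl => exact Relation.ReflTransGen.refl
  | tail _ he ih => exact Relation.ReflTransGen.head (pvE_symm grid rows cols bg he) ih

theorem pvConn_ok (grid : List (List Int)) (rows cols bg : Int) {p q : Int × Int}
    (hp : pvOk grid rows cols bg p) (h : pvConn grid rows cols bg p q) :
    pvOk grid rows cols bg q := by
  induction h with
  | refl => exact hp
  | tail _ he _ => exact he.2.1

theorem pvConn_val (grid : List (List Int)) (rows cols bg : Int) {p q : Int × Int}
    (h : pvConn grid rows cols bg p q) : pvG grid p.1 p.2 0 = pvG grid q.1 q.2 0 := by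
  induction h with
  | refl => rfl
  | tail _ he ih => exact ih.trans he.2.2.1

theorem pvAdj_cases {p q : Int × Int} (h : pvAdj p q) :
    ∃ d ∈ pvDirs, q = (p.1 + d.1, p.2 + d.2) := by
  obtain ⟨hp, hq⟩ := Prod.mk.injEq q.1 q.2 q.1 q.2 ▸ (rfl : q = q)
  unfold pvAdj at h
  unfold pvDirs
  rcases h with ⟨h1, h2 | h2⟩ | ⟨h1, h2 | h2⟩
  · exact ⟨(0, 1), by simp, by ext <;> simp <;> omega⟩
  · exact ⟨(0, -1), by simp, by ext <;> simp <;> omega⟩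
  · exact ⟨(1, 0), by simp, by ext <;> simp <;> omega⟩
  · exact ⟨(-1, 0), by simp, by ext <;> simp <;> omega⟩

-- ---- semantic view of the visited matrix ----
def pvVisRep (rows cols : Int) (vis : List (List Bool)) (S : Int × Int → Prop) : Prop :=
  pvShape rows.toNat cols.toNat vis ∧
  ∀ r c : Int, 0 ≤ r → r < rows → 0 ≤ c → c < cols →
    (pvG vis r c false = true ↔ S (r, c))

theorem pvVisRep_congr {rows cols : Int} {vis : List (List Bool)} {S T : Int × Int → Prop}
    (h : pvVisRep rows cols vis S) (hst : ∀ p, S p ↔ T p) : pvVisRep rows cols vis T := by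
  exact ⟨h.1, fun r c h1 h2 h3 h4 => (h.2 r c h1 h2 h3 h4).trans (hst (r, c))⟩

theorem pvVisRep_insert {rows cols : Int} {vis : List (List Bool)} {S : Int × Int → Prop}
    (h : pvVisRep rows cols vis S) {p : Int × Int}
    (h1 : 0 ≤ p.1) (h2 : p.1 < rows) (h3 : 0 ≤ p.2) (h4 : p.2 < cols) :
    pvVisRep rows cols (pvS vis p.1 p.2 true) (fun q => S q ∨ q = p) := by
  have hR : ((rows.toNat : Nat) : Int) = rows := by omega
  have hC : ((cols.toNat : Nat) : Int) = cols := by omega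
  refine ⟨pvShape_pvS h.1 true h1 (by omega) h3, ?_⟩
  intro r c hr0 hr hc0 hc
  rw [pvG_pvS h.1 true false h1 (by omega) h3 (by omega) hr0 (by omega) hc0 (by omega)]
  by_cases hrc : r = p.1 ∧ c = p.2
  · rw [if_pos hrc]
    simp only [true_iff]
    right
    exact Prod.ext hrc.1 hrc.2
  · rw [if_neg hrc]
    rw [h.2 r c hr0 hr hc0 hc]
    constructor
    · exact Or.inl
    · rintro (hS | hEq)
      · exact hS
      · exact absurd ⟨congrArg Prod.fst hEq, congrArg Prod.snd hEq⟩ hrc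

-- ---- semantic characterisation of the flood fill ----
-- V0-closedness propagates along paths
theorem pvV0_conn {grid : List (List Int)} {rows cols bg : Int} {V0 : Int × Int → Prop}
    (hcl : ∀ p q, V0 p → pvE grid rows cols bg p q → V0 q) {p q : Int × Int}
    (hp : V0 p) (h : pvConn grid rows cols bg p q) : V0 q := by
  induction h with
  | refl => exact hp
  | tail _ he ih => exact hcl _ _ ih he

-- the expand loop over an explicit direction list
def pvDirsFold (grid : List (List Int)) (rows cols v : Int) (cr cc : Int)
    (st : List (List Bool) × List (Int × Int)) (ds : List (Int × Int)) :
    List (List Bool) × List (Int × Int) :=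
  ds.foldl (fun st d =>
    let nr := cr + d.1
    let nc := cc + d.2
    if 0 ≤ nr ∧ nr < rows ∧ 0 ≤ nc ∧ nc < cols ∧ pvG st.1 nr nc false = false ∧
        pvG grid nr nc 0 = v then
      (pvS st.1 nr nc true, st.2 ++ [(nr, nc)])
    else st) st

theorem pvExpandCell_eq_dirsFold (grid : List (List Int)) (rows cols v : Int)
    (st : List (List Bool) × List (Int × Int)) (cr cc : Int) :
    pvExpandCell grid rows cols v st cr cc = pvDirsFold grid rows cols v cr cc st pvDirs := rfl

theorem pvDirsFold_sem (grid : List (List Int)) (rows cols bg v : Int) (x : Int × Int)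
    (hok : pvOk grid rows cols bg x) (hval : pvG grid x.1 x.2 0 = v) :
    ∀ (ds : List (Int × Int)), (∀ d ∈ ds, pvAdj x (x.1 + d.1, x.2 + d.2)) →
    ∀ (vis : List (List Bool)) (acc : List (Int × Int)) (S : Int × Int → Prop),
      pvVisRep rows cols vis S →
    ∃ added vis',
      pvDirsFold grid rows cols v x.1 x.2 (vis, acc) ds = (vis', acc ++ added) ∧
      pvVisRep rows cols vis' (fun q => S q ∨ q ∈ added) ∧
      added.Nodup ∧
      (∀ q ∈ added, pvE grid rows cols bg x q ∧ ¬ S q) ∧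
      (∀ d ∈ ds, S (x.1 + d.1, x.2 + d.2) ∨ (x.1 + d.1, x.2 + d.2) ∈ added ∨
        ¬ pvE grid rows cols bg x (x.1 + d.1, x.2 + d.2)) := by
  intro ds
  induction ds with
  | nil =>
    intro _ vis acc S hrep
    refine ⟨[], vis, by simp [pvDirsFold], ?_, by simp, by simp, by simp⟩
    exact pvVisRep_congr hrep (by simp)
  | cons d ds ih =>
    intro hds vis acc S hrep
    set y : Int × Int := (x.1 + d.1, x.2 + d.2) with hy
    have hadj : pvAdj x y := hds d (by simp)
    have hcond_iff : (0 ≤ x.1 + d.1 ∧ x.1 + d.1 < rows ∧ 0 ≤ x.2 + d.2 ∧ x.2 + d.2 < cols ∧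
        pvG vis (x.1 + d.1) (x.2 + d.2) false = false ∧ pvG grid (x.1 + d.1) (x.2 + d.2) 0 = v)
        ↔ (pvE grid rows cols bg x y ∧ ¬ S y) := by
      constructor
      · rintro ⟨h1, h2, h3, h4, h5, h6⟩
        have hOky : pvOk grid rows cols bg y := by
          refine ⟨h1, h2, h3, h4, ?_⟩
          rw [show y.1 = x.1 + d.1 from rfl, show y.2 = x.2 + d.2 from rfl, h6, ← hval]
          exact hok.2.2.2.2
        refine ⟨⟨hok, hOky, by rw [hval]; exact h6.symm, hadj⟩, ?_⟩
        intro hS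
        have := (hrep.2 (x.1 + d.1) (x.2 + d.2) h1 h2 h3 h4).2 hS
        rw [this] at h5
        exact absurd h5 (by simp)
      · rintro ⟨hE, hnS⟩
        obtain ⟨_, hOky, hgv, _⟩ := hE
        refine ⟨hOky.1, hOky.2.1, hOky.2.2.1, hOky.2.2.2.1, ?_, by rw [← hval]; exact hgv.symm⟩
        by_cases hb : pvG vis (x.1 + d.1) (x.2 + d.2) false = true
        · exact absurd ((hrep.2 _ _ hOky.1 hOky.2.1 hOky.2.2.1 hOky.2.2.2.1).1 hb) hnS
        · simpa using hb
    simp only [pvDirsFold, List.foldl_cons]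
    by_cases hcond : 0 ≤ x.1 + d.1 ∧ x.1 + d.1 < rows ∧ 0 ≤ x.2 + d.2 ∧ x.2 + d.2 < cols ∧
        pvG vis (x.1 + d.1) (x.2 + d.2) false = false ∧ pvG grid (x.1 + d.1) (x.2 + d.2) 0 = v
    · rw [if_pos hcond]
      obtain ⟨hE, hnS⟩ := hcond_iff.1 hcond
      have hrep1 : pvVisRep rows cols (pvS vis (x.1 + d.1) (x.2 + d.2) true)
          (fun q => S q ∨ q = y) := by
        have := pvVisRep_insert hrep (p := y) hE.2.1.1 hE.2.1.2.1 hE.2.1.2.2.1 hE.2.1.2.2.2.1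
        exact this
      obtain ⟨add2, vis', heq, hrep', hnd, hprops, hcov⟩ :=
        ih (fun d' hd' => hds d' (by simp [hd'])) _ (acc ++ [y]) _ hrep1
      refine ⟨y :: add2, vis', ?_, ?_, ?_, ?_, ?_⟩
      · rw [show acc ++ y :: add2 = (acc ++ [y]) ++ add2 by simp]
        rw [show (x.1 + d.1, x.2 + d.2) = y from hy.symm]
        exact heq
      · refine pvVisRep_congr hrep' ?_
        intro q
        simp only [List.mem_cons]
        tauto
      · refine List.nodup_cons.2 ⟨?_, hnd⟩
        intro hmem
        exact ((hprops y hmem).2 (Or.inr rfl)).elim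
      · intro q hq
        rcases List.mem_cons.1 hq with h' | h'
        · subst h'; exact ⟨hE, hnS⟩
        · obtain ⟨hE', hnS'⟩ := hprops q h'
          exact ⟨hE', fun hc => hnS' (Or.inl hc)⟩
      · intro d' hd'
        rcases List.mem_cons.1 hd' with h' | h'
        · subst h'
          exact Or.inr (Or.inl (List.mem_cons.2 (Or.inl hy.symm)))
        · rcases hcov d' h' with h'' | h'' | h''
          · rcases h'' with h3 | h3
            · exact Or.inl h3
            · exact Or.inr (Or.inl (List.mem_cons.2 (Or.inl h3)))
          · exact Or.inr (Or.inl (List.mem_cons.2 (Or.inr h'')))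
          · exact Or.inr (Or.inr h'')
    · rw [if_neg hcond]
      obtain ⟨add2, vis', heq, hrep', hnd, hprops, hcov⟩ :=
        ih (fun d' hd' => hds d' (by simp [hd'])) vis acc S hrep
      refine ⟨add2, vis', heq, hrep', hnd, hprops, ?_⟩
      intro d' hd'
      rcases List.mem_cons.1 hd' with h' | h'
      · subst h'
        by_cases hEy : pvE grid rows cols bg x y
        · by_cases hSy : S y
          · exact Or.inl hSy
          · exact absurd (hcond_iff.2 ⟨hEy, hSy⟩) hcond
        · exact Or.inr (Or.inr hEy)
      · exact hcov d' h'

theorem pvExpandCell_sem (grid : List (List Int)) (rows cols bg v : Int) (x : Int × Int)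
    (hok : pvOk grid rows cols bg x) (hval : pvG grid x.1 x.2 0 = v)
    (vis : List (List Bool)) (S : Int × Int → Prop) (hrep : pvVisRep rows cols vis S) :
    ∃ added vis',
      pvExpandCell grid rows cols v (vis, []) x.1 x.2 = (vis', added) ∧
      pvVisRep rows cols vis' (fun q => S q ∨ q ∈ added) ∧
      added.Nodup ∧
      (∀ q ∈ added, pvE grid rows cols bg x q ∧ ¬ S q) ∧
      (∀ q, pvE grid rows cols bg x q → S q ∨ q ∈ added) := by
  have hds : ∀ d ∈ pvDirs, pvAdj x (x.1 + d.1, x.2 + d.2) := by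
    intro d hd
    unfold pvDirs at hd
    simp only [List.mem_cons, List.not_mem_nil, or_false] at hd
    unfold pvAdj
    rcases hd with h | h | h | h <;> subst h <;> simp
  obtain ⟨added, vis', heq, hrep', hnd, hprops, hcov⟩ :=
    pvDirsFold_sem grid rows cols bg v x hok hval pvDirs hds vis [] S hrep
  refine ⟨added, vis', by rw [pvExpandCell_eq_dirsFold, heq]; simp, hrep', hnd, hprops, ?_⟩
  intro q hE
  obtain ⟨d, hd, hq⟩ := pvAdj_cases hE.2.2.2
  rcases hcov d hd with h | h | h
  · rw [hq]; exact Or.inl h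
  · rw [hq]; exact Or.inr h
  · rw [← hq] at h
    exact absurd hE h

theorem pvExpandAll_sem (grid : List (List Int)) (rows cols bg v : Int)
    (start : Int × Int) (hok : pvOk grid rows cols bg start)
    (hval : pvG grid start.1 start.2 0 = v) (V0 : Int × Int → Prop) :
    ∀ (front : List (Int × Int)) (vis : List (List Bool)) (cells : List (Int × Int)),
      (∀ p ∈ front, p ∈ cells) →
      (∀ p ∈ cells, pvConn grid rows cols bg start p) →
      cells.Nodup →
      pvVisRep rows cols vis (fun q => V0 q ∨ q ∈ cells) →
    ∃ added vis',
      pvExpandAll grid rows cols v vis front = (vis', added) ∧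
      pvVisRep rows cols vis' (fun q => V0 q ∨ q ∈ cells ∨ q ∈ added) ∧
      (cells ++ added).Nodup ∧
      (∀ p ∈ added, pvConn grid rows cols bg start p) ∧
      (∀ x ∈ front, ∀ q, pvE grid rows cols bg x q → V0 q ∨ q ∈ cells ∨ q ∈ added) := by
  intro front
  induction front with
  | nil =>
    intro vis cells _ hconn hnd hrep
    refine ⟨[], vis, rfl, pvVisRep_congr hrep (by simp), by simpa using hnd, by simp, by simp⟩
  | cons c t ih =>
    intro vis cells hfront hconn hnd hrep
    have hconnc : pvConn grid rows cols bg start c := hconn c (hfront c (by simp))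
    have hokc : pvOk grid rows cols bg c := pvConn_ok grid rows cols bg hok hconnc
    have hvalc : pvG grid c.1 c.2 0 = v := by
      rw [← pvConn_val grid rows cols bg hconnc]; exact hval
    obtain ⟨add1, vis1, heq1, hrep1, hnd1, hprops1, hcov1⟩ :=
      pvExpandCell_sem grid rows cols bg v c hokc hvalc vis _ hrep
    have hrep1' : pvVisRep rows cols vis1 (fun q => V0 q ∨ q ∈ cells ++ add1) := by
      refine pvVisRep_congr hrep1 ?_
      intro q; simp only [List.mem_append]; tauto
    have hconn1 : ∀ p ∈ cells ++ add1, pvConn grid rows cols bg start p := by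
      intro p hp
      rcases List.mem_append.1 hp with h | h
      · exact hconn p h
      · exact Relation.ReflTransGen.tail hconnc (hprops1 p h).1
    have hnd1' : (cells ++ add1).Nodup := by
      rw [List.nodup_append]
      refine ⟨hnd, hnd1, ?_⟩
      exact fun a ha b hb heq => (hprops1 b hb).2 (Or.inr (heq ▸ ha))
    obtain ⟨add2, vis2, heq2, hrep2, hnd2, hprops2, hcov2⟩ :=
      ih vis1 (cells ++ add1) (fun p hp => List.mem_append.2 (Or.inl (hfront p (by simp [hp]))))
        hconn1 hnd1' hrep1'
    refine ⟨add1 ++ add2, vis2, ?_, ?_, ?_, ?_, ?_⟩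
    · simp only [pvExpandAll]
      rw [heq1]
      simp only
      rw [heq2]
    · refine pvVisRep_congr hrep2 ?_
      intro q; simp only [List.mem_append]; tauto
    · rw [← List.append_assoc]
      exact hnd2
    · intro p hp
      rcases List.mem_append.1 hp with h | h
      · exact Relation.ReflTransGen.tail hconnc (hprops1 p h).1
      · exact hprops2 p h
    · intro x hx q hEq
      rcases List.mem_cons.1 hx with h | h
      · subst h
        rcases hcov1 q hEq with h' | h'
        · rcases h' with h'' | h''
          · exact Or.inl h''
          · exact Or.inr (Or.inl h'')
        · exact Or.inr (Or.inr (List.mem_append.2 (Or.inl h')))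
      · rcases hcov2 x h q hEq with h' | h' | h'
        · exact Or.inl h'
        · rcases List.mem_append.1 h' with h'' | h''
          · exact Or.inr (Or.inl h'')
          · exact Or.inr (Or.inr (List.mem_append.2 (Or.inl h'')))
        · exact Or.inr (Or.inr (List.mem_append.2 (Or.inr h')))

theorem pvFill_sem (grid : List (List Int)) (rows cols bg v : Int)
    (start : Int × Int) (hok : pvOk grid rows cols bg start)
    (hval : pvG grid start.1 start.2 0 = v) (V0 : Int × Int → Prop) :
    ∀ (U : Nat) (vis : List (List Bool)) (front cells : List (Int × Int)) (nB : Nat),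
      (∀ p ∈ front, p ∈ cells) →
      (∀ p ∈ cells, pvConn grid rows cols bg start p) →
      cells.Nodup →
      pvVisRep rows cols vis (fun q => V0 q ∨ q ∈ cells) →
      (∀ p ∈ cells, p ∉ front → ∀ q, pvE grid rows cols bg p q → V0 q ∨ q ∈ cells) →
      pvUnvis vis = U → U + 1 ≤ nB →
      (let res := pvFill grid rows cols v nB vis front cells
       pvVisRep rows cols res.1 (fun q => V0 q ∨ q ∈ res.2) ∧ res.2.Nodup ∧
       (∀ p ∈ res.2, pvConn grid rows cols bg start p) ∧
       (∃ t, res.2 = cells ++ t) ∧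
       (∀ p ∈ res.2, ∀ q, pvE grid rows cols bg p q → V0 q ∨ q ∈ res.2)) := by
  intro U
  induction U using Nat.strong_induction_on with
  | _ U ihU =>
    intro vis front cells nB hfront hconn hnd hrep hproc hU hnB
    cases front with
    | nil =>
      rw [pvFill_nilq]
      exact ⟨hrep, hnd, hconn, ⟨[], by simp⟩,
        fun p hp q hEq => hproc p hp (by simp) q hEq⟩
    | cons c t =>
      cases nB with
      | zero => omega
      | succ m =>
        obtain ⟨added, vis', heq, hrep', hnd', hconn', hcov'⟩ :=
          pvExpandAll_sem grid rows cols bg v start hok hval V0 (c :: t) vis cells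
            hfront hconn hnd hrep
        have hstep : pvFill grid rows cols v (m + 1) vis (c :: t) cells =
            pvFill grid rows cols v m vis' added (cells ++ added) := by
          simp only [pvFill]
          rw [heq]
        rw [hstep]
        have hR : ((rows.toNat : Nat) : Int) = rows := by
          have := hok.2.1; have := hok.1; omega
        have hC : ((cols.toNat : Nat) : Int) = cols := by
          have := hok.2.2.2.1; have := hok.2.2.1; omega
        obtain ⟨hsh, hcount⟩ := pvExpandAll_inv grid hR hC (c :: t) vis hrep.1
        rw [heq] at hcount
        simp only at hcount
        have hfront' : ∀ p ∈ added, p ∈ cells ++ added :=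
          fun p hp => List.mem_append.2 (Or.inr hp)
        have hconn'' : ∀ p ∈ cells ++ added, pvConn grid rows cols bg start p := by
          intro p hp
          rcases List.mem_append.1 hp with h | h
          · exact hconn p h
          · exact hconn' p h
        have hproc' : ∀ p ∈ cells ++ added, p ∉ added →
            ∀ q, pvE grid rows cols bg p q → V0 q ∨ q ∈ cells ++ added := by
          intro p hp hpna q hEq
          rcases List.mem_append.1 hp with h | h
          · by_cases hpf : p ∈ c :: t
            · rcases hcov' p hpf q hEq with h' | h' | h'
              · exact Or.inl h'
              · exact Or.inr (List.mem_append.2 (Or.inl h'))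
              · exact Or.inr (List.mem_append.2 (Or.inr h'))
            · rcases hproc p h hpf q hEq with h' | h'
              · exact Or.inl h'
              · exact Or.inr (List.mem_append.2 (Or.inl h'))
          · exact absurd h hpna
        have hrep'' : pvVisRep rows cols vis' (fun q => V0 q ∨ q ∈ cells ++ added) := by
          refine pvVisRep_congr hrep' ?_
          intro q
          rw [List.mem_append]
        cases added with
        | nil =>
          rw [pvFill_nilq]
          simp only [List.append_nil] at hrep'' hnd' hproc' ⊢
          refine ⟨hrep'', hnd', hconn, ⟨[], by simp⟩, ?_⟩
          intro p hp q hEq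
          exact hproc' p hp (by simp) q hEq
        | cons a at' =>
          have hlt : pvUnvis vis' < U := by
            simp only [List.length_cons] at hcount
            omega
          obtain ⟨hrepf, hndf, hconnf, hpref, hcovf⟩ :=
            ihU (pvUnvis vis') hlt vis' (a :: at') (cells ++ (a :: at')) m
              hfront' hconn'' hnd' hrep'' hproc' rfl (by omega)
          refine ⟨hrepf, hndf, hconnf, ?_, hcovf⟩
          obtain ⟨t', ht'⟩ := hpref
          exact ⟨(a :: at') ++ t', by rw [ht', List.append_assoc]⟩

-- completeness: a closed superset of the start contains the whole class
theorem pvClass_sub (grid : List (List Int)) (rows cols bg : Int)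
    (V0 : Int × Int → Prop) (hcl : ∀ p q, V0 p → pvE grid rows cols bg p q → V0 q)
    (start : Int × Int) (hnV0 : ¬ V0 start) (Sfin : List (Int × Int))
    (hstart : start ∈ Sfin)
    (hclosed : ∀ p ∈ Sfin, ∀ q, pvE grid rows cols bg p q → V0 q ∨ q ∈ Sfin) :
    ∀ q, pvConn grid rows cols bg start q → q ∈ Sfin := by
  intro q hq
  induction hq with
  | refl => exact hstart
  | @tail b c hb he ih =>
    rcases hclosed b ih c he with h | h
    · exfalso
      have hcb : pvConn grid rows cols bg c start := by
        apply pvConn_symm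
        exact Relation.ReflTransGen.tail hb he
      exact hnV0 (pvV0_conn hcl h hcb)
    · exact h

-- the BFS launched by A's scan collects exactly the class of its start
theorem pvRegion_sem (grid : List (List Int)) (rows cols bg : Int)
    (V0 : Int × Int → Prop) (hcl : ∀ p q, V0 p → pvE grid rows cols bg p q → V0 q)
    (start : Int × Int) (hok : pvOk grid rows cols bg start) (hnV0 : ¬ V0 start)
    (vis : List (List Bool)) (hrep : pvVisRep rows cols vis V0) :
    (let vis1 := pvS vis start.1 start.2 true
     let res := pvBfsA grid rows cols (pvG grid start.1 start.2 0) (pvUnvis vis1 + 1) vis1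
       [start] [start]
     pvVisRep rows cols res.1 (fun q => V0 q ∨ pvConn grid rows cols bg start q) ∧
     res.2.Nodup ∧ (∀ q, q ∈ res.2 ↔ pvConn grid rows cols bg start q) ∧
     (∃ t, res.2 = start :: t)) := by
  intro vis1 res
  have hR : ((rows.toNat : Nat) : Int) = rows := by
    have := hok.2.1; have := hok.1; omega
  have hC : ((cols.toNat : Nat) : Int) = cols := by
    have := hok.2.2.2.1; have := hok.2.2.1; omega
  have hrep1 : pvVisRep rows cols vis1 (fun q => V0 q ∨ q ∈ [start]) := by
    refine pvVisRep_congr (pvVisRep_insert hrep hok.1 hok.2.1 hok.2.2.1 hok.2.2.2.1) ?_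
    intro q; simp
  have hcross : res = pvFill grid rows cols (pvG grid start.1 start.2 0)
      ([start].length + pvUnvis vis1) vis1 [start] [start] := by
    show pvBfsA grid rows cols (pvG grid start.1 start.2 0) (pvUnvis vis1 + 1) vis1 [start]
      [start] = _
    rw [show pvUnvis vis1 + 1 = [start].length + pvUnvis vis1 from by simp [Nat.add_comm]]
    exact pvBfs_cross grid hR hC (pvUnvis vis1) vis1 [start] [start] _ hrep1.1 rfl (by simp)
  have hsem := pvFill_sem grid rows cols bg (pvG grid start.1 start.2 0) start hok rfl V0
    (pvUnvis vis1) vis1 [start] [start] ([start].length + pvUnvis vis1)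
    (by simp)
    (by intro p hp; simp at hp; subst hp; exact Relation.ReflTransGen.refl)
    (by simp) hrep1 (by simp) rfl (by simp)
  rw [← hcross] at hsem
  obtain ⟨hrepf, hndf, hconnf, ⟨t', ht'⟩, hcovf⟩ := hsem
  have hstart_mem : start ∈ res.2 := by rw [ht']; simp
  have hcomplete : ∀ q, pvConn grid rows cols bg start q → q ∈ res.2 :=
    pvClass_sub grid rows cols bg V0 hcl start hnV0 res.2 hstart_mem hcovf
  have hmem_iff : ∀ q, q ∈ res.2 ↔ pvConn grid rows cols bg start q :=
    fun q => ⟨fun h => hconnf q h, fun h => hcomplete q h⟩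
  refine ⟨?_, hndf, hmem_iff, ⟨t', by simpa using ht'⟩⟩
  refine pvVisRep_congr hrepf ?_
  intro q
  rw [hmem_iff q]

-- ---- union-find correctness ----
def pvPar (parent : List Int) (i : Int) : Int := PySem.List.pyGetD parent i 0

def pvInR (parent : List Int) (i : Int) : Prop := 0 ≤ i ∧ i < (parent.length : Int)

def pvParInv (parent : List Int) : Prop :=
  ∀ i : Int, pvInR parent i → 0 ≤ pvPar parent i ∧ pvPar parent i ≤ i

def pvRoot (parent : List Int) (i : Int) : Int := ufFind parent (i.toNat + 1) i

theorem ufFind_succ (parent : List Int) (n : Nat) (x : Int) :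
    ufFind parent (n + 1) x =
      if pvPar parent x ≠ x then ufFind parent n (pvPar parent x) else x := rfl

-- fuel irrelevance and basic root facts, by strong induction on the chain
theorem pvRoot_spec (parent : List Int) (hinv : pvParInv parent) :
    ∀ (k : Nat) (i : Int), pvInR parent i → i.toNat ≤ k →
      (∀ fuel : Nat, i.toNat < fuel → ufFind parent fuel i = pvRoot parent i) ∧
      pvPar parent (pvRoot parent i) = pvRoot parent i ∧
      0 ≤ pvRoot parent i ∧ pvRoot parent i ≤ i := by
  intro k
  induction k with
  | zero =>
    intro i hi hk
    obtain ⟨hi1, hi2⟩ := hi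
    have hi0 : i = 0 := by omega
    subst hi0
    obtain ⟨hp0, hple⟩ := hinv 0 ⟨hi1, hi2⟩
    have hfix : pvPar parent 0 = 0 := by omega
    have hroot : pvRoot parent 0 = 0 := by
      unfold pvRoot
      rw [ufFind_succ]
      simp [hfix]
    refine ⟨?_, by rw [hroot]; exact hfix, by rw [hroot], by rw [hroot]⟩
    intro fuel hfuel
    cases fuel with
    | zero => omega
    | succ m => rw [ufFind_succ]; simp [hfix, hroot]
  | succ n ihn =>
    intro i hi hk
    obtain ⟨hi1, hi2⟩ := hi
    obtain ⟨hp0, hple⟩ := hinv i ⟨hi1, hi2⟩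
    by_cases hfix : pvPar parent i = i
    · have hroot : pvRoot parent i = i := by
        unfold pvRoot
        rw [ufFind_succ]
        simp [hfix]
      refine ⟨?_, by rw [hroot]; exact hfix, by rw [hroot]; exact hi1, by rw [hroot]⟩
      intro fuel hfuel
      cases fuel with
      | zero => omega
      | succ m => rw [ufFind_succ]; simp [hfix, hroot]
    · have hplt : pvPar parent i < i := lt_of_le_of_ne hple hfix
      have hpin : pvInR parent (pvPar parent i) := ⟨hp0, by omega⟩
      have hpk : (pvPar parent i).toNat ≤ n := by omega
      obtain ⟨hfuel', hfix', h0', hle'⟩ := ihn (pvPar parent i) hpin hpk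
      have hroot : pvRoot parent i = pvRoot parent (pvPar parent i) := by
        unfold pvRoot
        rw [ufFind_succ, if_pos hfix]
        exact hfuel' i.toNat (by omega)
      refine ⟨?_, by rw [hroot]; exact hfix', by rw [hroot]; exact h0',
        by rw [hroot]; omega⟩
      intro fuel hfuel
      cases fuel with
      | zero => omega
      | succ m =>
        rw [ufFind_succ, if_pos hfix, hroot]
        exact hfuel' m (by omega)

theorem pvRoot_fuel (parent : List Int) (hinv : pvParInv parent) {i : Int}
    (hi : pvInR parent i) {fuel : Nat} (hf : i.toNat < fuel) :
    ufFind parent fuel i = pvRoot parent i :=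
  ((pvRoot_spec parent hinv i.toNat i hi (le_refl _)).1) fuel hf

theorem pvRoot_fix (parent : List Int) (hinv : pvParInv parent) {i : Int}
    (hi : pvInR parent i) : pvPar parent (pvRoot parent i) = pvRoot parent i :=
  (pvRoot_spec parent hinv i.toNat i hi (le_refl _)).2.1

theorem pvRoot_range (parent : List Int) (hinv : pvParInv parent) {i : Int}
    (hi : pvInR parent i) : 0 ≤ pvRoot parent i ∧ pvRoot parent i ≤ i :=
  (pvRoot_spec parent hinv i.toNat i hi (le_refl _)).2.2

theorem pvRoot_par (parent : List Int) (hinv : pvParInv parent) {i : Int}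
    (hi : pvInR parent i) (hfix : pvPar parent i ≠ i) :
    pvRoot parent i = pvRoot parent (pvPar parent i) := by
  obtain ⟨hi1, hi2⟩ := hi
  obtain ⟨hp0, hple⟩ := hinv i ⟨hi1, hi2⟩
  have hplt : pvPar parent i < i := lt_of_le_of_ne hple hfix
  unfold pvRoot
  rw [ufFind_succ, if_pos hfix]
  exact pvRoot_fuel parent hinv ⟨hp0, by omega⟩ (by omega)

theorem pvRoot_of_fix (parent : List Int) {i : Int} (hfix : pvPar parent i = i) :
    pvRoot parent i = i := by
  unfold pvRoot
  rw [ufFind_succ]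
  simp [hfix]

-- point update of the parent array
theorem pvPar_set (parent : List Int) {j : Int} (hj : pvInR parent j) (v : Int)
    {i : Int} (hi0 : 0 ≤ i) :
    pvPar (PySem.List.pySetD parent j v) i = if i = j then v else pvPar parent i := by
  obtain ⟨hj1, hj2⟩ := hj
  unfold pvPar
  rw [PySem.List.pySetD_of_nonneg _ _ hj1]
  by_cases hij : i = j
  · subst hij
    rw [if_pos rfl, PySem.List.pyGetD_eq_getElem _ 0 hj1
      (by rw [List.length_set]; exact hj2)]
    rw [List.getElem_set]
    simp
  · rw [if_neg hij]
    by_cases hlen : i < (parent.length : Int)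
    · rw [PySem.List.pyGetD_eq_getElem _ 0 hi0 (by rw [List.length_set]; exact hlen),
        PySem.List.pyGetD_eq_getElem parent 0 hi0 hlen, List.getElem_set]
      rw [if_neg (by omega)]
    · have hnone : ∀ (xs : List Int), xs.length = parent.length →
          PySem.List.pyGetD xs i 0 = 0 := by
        intro xs hxs
        have : PySem.List.pyGet? xs i = none := by
          rw [PySem.List.pyGet?_eq_none_iff]
          intro hc
          obtain ⟨_, hc2⟩ := hc
          rw [hxs] at hc2
          omega
        unfold PySem.List.pyGetD
        rw [this]
        rfl
      rw [hnone _ (by rw [List.length_set]), hnone parent rfl]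

-- the root map after attaching root rb under root ra
theorem pvRoot_set (parent : List Int) (hinv : pvParInv parent) {ra rb : Int}
    (hra : pvInR parent ra) (hrb : pvInR parent rb) (hlt : ra < rb)
    (hfa : pvPar parent ra = ra) (hfb : pvPar parent rb = rb) :
    pvParInv (PySem.List.pySetD parent rb ra) ∧
    (∀ i, pvInR parent i →
      pvRoot (PySem.List.pySetD parent rb ra) i =
        if pvRoot parent i = rb then ra else pvRoot parent i) := by
  set parent' := PySem.List.pySetD parent rb ra with hp'
  have hlen : parent'.length = parent.length := by
    rw [hp']; exact PySem.List.length_pySetD parent rb ra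
  have hpar' : ∀ i, 0 ≤ i → pvPar parent' i = if i = rb then ra else pvPar parent i :=
    fun i hi0 => pvPar_set parent hrb ra hi0
  have hinr : ∀ i, pvInR parent' i ↔ pvInR parent i := by
    intro i; unfold pvInR; rw [hlen]
  have hinv' : pvParInv parent' := by
    intro i hi
    obtain ⟨hia, hib⟩ := hi
    rw [hpar' i hia]
    by_cases hirb : i = rb
    · subst hirb
      rw [if_pos rfl]
      exact ⟨hra.1, by omega⟩
    · rw [if_neg hirb]
      exact hinv i ⟨hia, by rw [← hlen]; exact hib⟩
  refine ⟨hinv', ?_⟩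
  intro i hi
  induction hn : i.toNat using Nat.strong_induction_on generalizing i with
  | _ n ihn =>
  have hi' := hi
  obtain ⟨hia, hib⟩ := hi'
  by_cases hirb : i = rb
  · have h1 : pvPar parent' i = ra := by rw [hpar' i hia, if_pos hirb]
    have hfa' : pvPar parent' ra = ra := by
      rw [hpar' ra hra.1, if_neg (by omega)]
      exact hfa
    have h2 : pvRoot parent' i = pvRoot parent' ra := by
      rw [pvRoot_par parent' hinv' ((hinr i).2 hi) (by rw [h1]; omega), h1]
    rw [h2, pvRoot_of_fix parent' hfa', hirb, pvRoot_of_fix parent hfb]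
    simp
  · have hpar'' : pvPar parent' i = pvPar parent i := by rw [hpar' i hia, if_neg hirb]
    by_cases hfix : pvPar parent i = i
    · rw [pvRoot_of_fix parent' (by rw [hpar'']; exact hfix), pvRoot_of_fix parent hfix]
      rw [if_neg hirb]
    · obtain ⟨hp0, hple⟩ := hinv i hi
      have hplt : pvPar parent i < i := lt_of_le_of_ne hple hfix
      have hpin : pvInR parent (pvPar parent i) := ⟨hp0, by omega⟩
      rw [pvRoot_par parent' hinv' ((hinr i).2 hi) (by rw [hpar'']; exact hfix), hpar'']
      rw [pvRoot_par parent hinv hi hfix]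
      exact ihn (pvPar parent i).toNat (by omega) (pvPar parent i) hpin rfl

-- generic EqvGen plumbing
theorem pvEqvGen_congr {α : Type} {b1 b2 : α → α → Prop}
    (h : ∀ u w, b1 u w → Relation.EqvGen b2 u w) {x y : α}
    (hxy : Relation.EqvGen b1 x y) : Relation.EqvGen b2 x y := by
  induction hxy with
  | rel u w hb => exact h u w hb
  | refl => exact Relation.EqvGen.refl _
  | symm _ _ _ ih => exact Relation.EqvGen.symm _ _ ih
  | trans _ _ _ _ _ ih1 ih2 => exact Relation.EqvGen.trans _ _ _ ih1 ih2

-- the union-find invariant carried through the union pass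
def pvUFGood (parent : List Int) (base : Int → Int → Prop) : Prop :=
  pvParInv parent ∧
  (∀ i, pvInR parent i → Relation.EqvGen base (pvPar parent i) i) ∧
  (∀ x y, Relation.EqvGen base x y → pvRoot parent x = pvRoot parent y)

theorem pvRoot_relEqv (parent : List Int) (base : Int → Int → Prop)
    (hgood : pvUFGood parent base) :
    ∀ (k : Nat) (i : Int), pvInR parent i → i.toNat ≤ k →
      Relation.EqvGen base (pvRoot parent i) i := by
  intro k
  induction k with
  | zero =>
    intro i hi hk
    obtain ⟨hi1, hi2⟩ := hi
    have : i = 0 := by omega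
    subst this
    have hfix : pvPar parent 0 = 0 := by
      have := hgood.1 0 ⟨hi1, hi2⟩; omega
    rw [pvRoot_of_fix parent hfix]
    exact Relation.EqvGen.refl _
  | succ n ihn =>
    intro i hi hk
    obtain ⟨hi1, hi2⟩ := hi
    by_cases hfix : pvPar parent i = i
    · rw [pvRoot_of_fix parent hfix]
      exact Relation.EqvGen.refl _
    · obtain ⟨hp0, hple⟩ := hgood.1 i ⟨hi1, hi2⟩
      have hplt : pvPar parent i < i := lt_of_le_of_ne hple hfix
      have hpin : pvInR parent (pvPar parent i) := ⟨hp0, by omega⟩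
      rw [pvRoot_par parent hgood.1 ⟨hi1, hi2⟩ hfix]
      exact Relation.EqvGen.trans _ _ _ (ihn (pvPar parent i) hpin (by omega))
        (hgood.2.1 i ⟨hi1, hi2⟩)

-- one union keeps the invariant, for the extended base relation
theorem pvUnion_step (parent : List Int) (base : Int → Int → Prop)
    (hgood : pvUFGood parent base)
    (hbase : ∀ u w, base u w → pvInR parent u ∧ pvInR parent w)
    {a b : Int} (ha : pvInR parent a) (hb : pvInR parent b) :
    (ufUnion parent a b).length = parent.length ∧
    pvUFGood (ufUnion parent a b) (fun u w => base u w ∨ (u = a ∧ w = b)) := by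
  obtain ⟨ha1, ha2⟩ := ha
  obtain ⟨hb1, hb2⟩ := hb
  have hfind_a : ufFind parent parent.length a = pvRoot parent a :=
    pvRoot_fuel parent hgood.1 ⟨ha1, ha2⟩ (by omega)
  have hfind_b : ufFind parent parent.length b = pvRoot parent b :=
    pvRoot_fuel parent hgood.1 ⟨hb1, hb2⟩ (by omega)
  have hra_in : pvInR parent (pvRoot parent a) := by
    obtain ⟨h1, h2⟩ := pvRoot_range parent hgood.1 ⟨ha1, ha2⟩
    exact ⟨h1, by omega⟩
  have hrb_in : pvInR parent (pvRoot parent b) := by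
    obtain ⟨h1, h2⟩ := pvRoot_range parent hgood.1 ⟨hb1, hb2⟩
    exact ⟨h1, by omega⟩
  have hfa : pvPar parent (pvRoot parent a) = pvRoot parent a :=
    pvRoot_fix parent hgood.1 ⟨ha1, ha2⟩
  have hfb : pvPar parent (pvRoot parent b) = pvRoot parent b :=
    pvRoot_fix parent hgood.1 ⟨hb1, hb2⟩
  have hEa : Relation.EqvGen base (pvRoot parent a) a :=
    pvRoot_relEqv parent base hgood a.toNat a ⟨ha1, ha2⟩ (le_refl _)
  have hEb : Relation.EqvGen base (pvRoot parent b) b :=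
    pvRoot_relEqv parent base hgood b.toNat b ⟨hb1, hb2⟩ (le_refl _)
  have hmono : ∀ x y, Relation.EqvGen base x y →
      Relation.EqvGen (fun u w => base u w ∨ (u = a ∧ w = b)) x y :=
    fun x y h => pvEqvGen_congr
      (fun u w hb' => Relation.EqvGen.rel u w (Or.inl hb')) h
  have hlink : Relation.EqvGen (fun u w => base u w ∨ (u = a ∧ w = b))
      (pvRoot parent a) (pvRoot parent b) := by
    refine Relation.EqvGen.trans _ _ _ (hmono _ _ hEa) ?_
    refine Relation.EqvGen.trans _ _ _
      (Relation.EqvGen.rel a b (Or.inr ⟨rfl, rfl⟩)) ?_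
    exact Relation.EqvGen.symm _ _ (hmono _ _ hEb)
  have hbase' : ∀ u w, (fun u w => base u w ∨ (u = a ∧ w = b)) u w →
      pvInR parent u ∧ pvInR parent w := by
    rintro u w (h | ⟨hu, hw⟩)
    · exact hbase u w h
    · subst hu; subst hw
      exact ⟨⟨ha1, ha2⟩, ⟨hb1, hb2⟩⟩
  unfold ufUnion
  rw [hfind_a, hfind_b]
  by_cases hlt : pvRoot parent a < pvRoot parent b
  · rw [if_pos hlt]
    obtain ⟨hinv', hroots'⟩ := pvRoot_set parent hgood.1 hra_in hrb_in hlt hfa hfb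
    have hlen : (PySem.List.pySetD parent (pvRoot parent b) (pvRoot parent a)).length =
        parent.length := PySem.List.length_pySetD _ _ _
    refine ⟨hlen, hinv', ?_, ?_⟩
    · intro i hi
      have hi' : pvInR parent i := by
        obtain ⟨h1, h2⟩ := hi
        exact ⟨h1, by rw [← hlen]; exact h2⟩
      rw [pvPar_set parent hrb_in (pvRoot parent a) hi'.1]
      by_cases hirb : i = pvRoot parent b
      · rw [if_pos hirb, hirb]
        exact hlink
      · rw [if_neg hirb]
        exact hmono _ _ (hgood.2.1 i hi')
    · intro x y hxy
      induction hxy with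
      | rel u w hb' =>
        obtain ⟨hu_in, hw_in⟩ := hbase' u w hb'
        rw [hroots' u hu_in, hroots' w hw_in]
        rcases hb' with h | ⟨hu, hw⟩
        · rw [hgood.2.2 u w (Relation.EqvGen.rel u w h)]
        · subst hu; subst hw
          rw [if_neg (by omega), if_pos rfl]
      | refl => rfl
      | symm _ _ _ ih => exact ih.symm
      | trans _ _ _ _ _ ih1 ih2 => exact ih1.trans ih2
  · rw [if_neg hlt]
    by_cases hgt : pvRoot parent b < pvRoot parent a
    · rw [if_pos hgt]
      obtain ⟨hinv', hroots'⟩ := pvRoot_set parent hgood.1 hrb_in hra_in hgt hfb hfa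
      have hlen : (PySem.List.pySetD parent (pvRoot parent a) (pvRoot parent b)).length =
          parent.length := PySem.List.length_pySetD _ _ _
      refine ⟨hlen, hinv', ?_, ?_⟩
      · intro i hi
        have hi' : pvInR parent i := by
          obtain ⟨h1, h2⟩ := hi
          exact ⟨h1, by rw [← hlen]; exact h2⟩
        rw [pvPar_set parent hra_in (pvRoot parent b) hi'.1]
        by_cases hira : i = pvRoot parent a
        · rw [if_pos hira, hira]
          exact Relation.EqvGen.symm _ _ hlink
        · rw [if_neg hira]
          exact hmono _ _ (hgood.2.1 i hi')
      · intro x y hxy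
        induction hxy with
        | rel u w hb' =>
          obtain ⟨hu_in, hw_in⟩ := hbase' u w hb'
          rw [hroots' u hu_in, hroots' w hw_in]
          rcases hb' with h | ⟨hu, hw⟩
          · rw [hgood.2.2 u w (Relation.EqvGen.rel u w h)]
          · subst hu; subst hw
            rw [if_pos rfl, if_neg (by omega)]
        | refl => rfl
        | symm _ _ _ ih => exact ih.symm
        | trans _ _ _ _ _ ih1 ih2 => exact ih1.trans ih2
    · rw [if_neg hgt]
      have heq : pvRoot parent a = pvRoot parent b := by omega
      refine ⟨rfl, hgood.1, ?_, ?_⟩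
      · intro i hi
        exact hmono _ _ (hgood.2.1 i hi)
      · intro x y hxy
        induction hxy with
        | rel u w hb' =>
          rcases hb' with h | ⟨hu, hw⟩
          · exact hgood.2.2 u w (Relation.EqvGen.rel u w h)
          · subst hu; subst hw
            exact heq
        | refl => rfl
        | symm _ _ _ ih => exact ih.symm
        | trans _ _ _ _ _ ih1 ih2 => exact ih1.trans ih2

theorem pvEqvGen_false {α : Type} {x y : α}
    (h : Relation.EqvGen (fun _ _ => False) x y) : x = y := by
  induction h with
  | rel _ _ hb => exact hb.elim
  | refl => rfl
  | symm _ _ _ ih => exact ih.symm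
  | trans _ _ _ _ _ ih1 ih2 => exact ih1.trans ih2

theorem pvUFGood_congr {parent : List Int} {b1 b2 : Int → Int → Prop}
    (h : ∀ u w, b1 u w ↔ b2 u w) (hg : pvUFGood parent b1) : pvUFGood parent b2 := by
  refine ⟨hg.1, ?_, ?_⟩
  · intro i hi
    exact pvEqvGen_congr (fun u w hb => Relation.EqvGen.rel u w ((h u w).1 hb))
      (hg.2.1 i hi)
  · intro x y hxy
    exact hg.2.2 x y
      (pvEqvGen_congr (fun u w hb => Relation.EqvGen.rel u w ((h u w).2 hb)) hxy)

theorem pvUF_fold (ops : List (Int × Int)) :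
    ∀ (parent : List Int) (base : Int → Int → Prop),
      pvUFGood parent base →
      (∀ u w, base u w → pvInR parent u ∧ pvInR parent w) →
      (∀ e ∈ ops, pvInR parent e.1 ∧ pvInR parent e.2) →
      (ops.foldl (fun par e => ufUnion par e.1 e.2) parent).length = parent.length ∧
      pvUFGood (ops.foldl (fun par e => ufUnion par e.1 e.2) parent)
        (fun u w => base u w ∨ (u, w) ∈ ops) := by
  induction ops with
  | nil =>
    intro parent base hgood hbase _
    refine ⟨rfl, pvUFGood_congr (fun u w => ?_) hgood⟩
    simp
  | cons e t ih =>
    intro parent base hgood hbase hops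
    obtain ⟨he1, he2⟩ := hops e (by simp)
    obtain ⟨hlen1, hgood1⟩ := pvUnion_step parent base hgood hbase he1 he2
    have hinr1 : ∀ i, pvInR (ufUnion parent e.1 e.2) i ↔ pvInR parent i := by
      intro i; unfold pvInR; rw [hlen1]
    have hbase1 : ∀ u w, (fun u w => base u w ∨ (u = e.1 ∧ w = e.2)) u w →
        pvInR (ufUnion parent e.1 e.2) u ∧ pvInR (ufUnion parent e.1 e.2) w := by
      rintro u w (h | ⟨hu, hw⟩)
      · obtain ⟨h1, h2⟩ := hbase u w h
        exact ⟨(hinr1 u).2 h1, (hinr1 w).2 h2⟩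
      · subst hu; subst hw
        exact ⟨(hinr1 e.1).2 he1, (hinr1 e.2).2 he2⟩
    have hops1 : ∀ e' ∈ t, pvInR (ufUnion parent e.1 e.2) e'.1 ∧
        pvInR (ufUnion parent e.1 e.2) e'.2 := by
      intro e' he'
      obtain ⟨h1, h2⟩ := hops e' (by simp [he'])
      exact ⟨(hinr1 e'.1).2 h1, (hinr1 e'.2).2 h2⟩
    obtain ⟨hlen2, hgood2⟩ := ih (ufUnion parent e.1 e.2) _ hgood1 hbase1 hops1
    simp only [List.foldl_cons]
    refine ⟨hlen2.trans hlen1, pvUFGood_congr (fun u w => ?_) hgood2⟩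
    constructor
    · rintro ((h | ⟨hu, hw⟩) | h)
      · exact Or.inl h
      · subst hu; subst hw
        exact Or.inr (by simp)
      · exact Or.inr (by simp [h])
    · rintro (h | h)
      · exact Or.inl (Or.inl h)
      · rcases List.mem_cons.1 h with h' | h'
        · refine Or.inl (Or.inr ?_)
          rw [Prod.ext_iff] at h'
          exact h'
        · exact Or.inr h'

-- ---- the edge list of B's union pass, and the flattened-index geometry ----
def pvIdx (cols : Int) (p : Int × Int) : Int := p.1 * cols + p.2

def pvAllCells (rows cols : Int) : List (Int × Int) :=
  (PySem.List.pyRange 0 rows 1).flatMap (fun r =>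
    (PySem.List.pyRange 0 cols 1).map (fun c => (r, c)))

def pvOps (grid : List (List Int)) (rows cols bg : Int) : List (Int × Int) :=
  (pvAllCells rows cols).flatMap (fun p =>
    if pvG grid p.1 p.2 0 = bg then []
    else
      (if p.2 + 1 < cols ∧ pvG grid p.1 (p.2 + 1) 0 = pvG grid p.1 p.2 0 then
        [(pvIdx cols p, pvIdx cols p + 1)] else []) ++
      (if p.1 + 1 < rows ∧ pvG grid (p.1 + 1) p.2 0 = pvG grid p.1 p.2 0 then
        [(pvIdx cols p, pvIdx cols p + cols)] else []))

theorem pvIdx_bound {rows cols : Int} {p : Int × Int}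
    (h1 : 0 ≤ p.1) (h2 : p.1 < rows) (h3 : 0 ≤ p.2) (h4 : p.2 < cols) :
    0 ≤ pvIdx cols p ∧ pvIdx cols p < rows * cols := by
  unfold pvIdx
  constructor
  · have := mul_nonneg h1 (le_trans h3 (le_of_lt h4))
    omega
  · have h5 : p.1 * cols + p.2 < (p.1 + 1) * cols := by
      rw [add_mul, one_mul]
      omega
    have h6 : (p.1 + 1) * cols ≤ rows * cols := by
      apply mul_le_mul_of_nonneg_right (by omega) (by omega)
    omega

theorem pvIdx_inj {cols : Int} {p q : Int × Int}
    (h3 : 0 ≤ p.2) (h4 : p.2 < cols) (h3' : 0 ≤ q.2) (h4' : q.2 < cols)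
    (h : pvIdx cols p = pvIdx cols q) : p = q := by
  unfold pvIdx at h
  have hr : p.1 = q.1 := by
    by_contra hne
    rcases lt_or_gt_of_ne hne with hlt | hlt
    · have : (p.1 + 1) * cols ≤ q.1 * cols :=
        mul_le_mul_of_nonneg_right (by omega) (by omega)
      rw [add_mul, one_mul] at this
      omega
    · have : (q.1 + 1) * cols ≤ p.1 * cols :=
        mul_le_mul_of_nonneg_right (by omega) (by omega)
      rw [add_mul, one_mul] at this
      omega
  have hc : p.2 = q.2 := by rw [hr] at h; omega
  exact Prod.ext hr hc

theorem pvMem_allCells {rows cols : Int} {p : Int × Int} :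
    p ∈ pvAllCells rows cols ↔ 0 ≤ p.1 ∧ p.1 < rows ∧ 0 ≤ p.2 ∧ p.2 < cols := by
  unfold pvAllCells
  rw [List.mem_flatMap]
  constructor
  · rintro ⟨r, hr, hp⟩
    rw [List.mem_map] at hp
    obtain ⟨c, hc, hpc⟩ := hp
    obtain ⟨hr1, hr2⟩ := PySem.List.mem_pyRange_one.1 hr
    obtain ⟨hc1, hc2⟩ := PySem.List.mem_pyRange_one.1 hc
    rw [← hpc]
    exact ⟨hr1, hr2, hc1, hc2⟩
  · rintro ⟨h1, h2, h3, h4⟩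
    refine ⟨p.1, PySem.List.mem_pyRange_one.2 ⟨h1, h2⟩, ?_⟩
    rw [List.mem_map]
    exact ⟨p.2, PySem.List.mem_pyRange_one.2 ⟨h3, h4⟩, rfl⟩

theorem pvOps_mem {grid : List (List Int)} {rows cols bg : Int} {a b : Int} :
    (a, b) ∈ pvOps grid rows cols bg ↔
    ∃ p q, pvE grid rows cols bg p q ∧ (q = (p.1, p.2 + 1) ∨ q = (p.1 + 1, p.2)) ∧
      a = pvIdx cols p ∧ b = pvIdx cols q := by
  unfold pvOps
  rw [List.mem_flatMap]
  constructor
  · rintro ⟨p, hp, hmem⟩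
    obtain ⟨h1, h2, h3, h4⟩ := pvMem_allCells.1 hp
    by_cases hbg : pvG grid p.1 p.2 0 = bg
    · rw [if_pos hbg] at hmem
      simp at hmem
    · rw [if_neg hbg] at hmem
      have hokp : pvOk grid rows cols bg p := ⟨h1, h2, h3, h4, hbg⟩
      rcases List.mem_append.1 hmem with hmem' | hmem'
      · by_cases hc : p.2 + 1 < cols ∧ pvG grid p.1 (p.2 + 1) 0 = pvG grid p.1 p.2 0
        · rw [if_pos hc] at hmem'
          simp only [List.mem_singleton, Prod.mk.injEq] at hmem'
          obtain ⟨hA, hB⟩ := hmem'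
          refine ⟨p, (p.1, p.2 + 1), ?_, Or.inl rfl, ?_, ?_⟩
          · refine ⟨hokp, ⟨h1, h2, by omega, hc.1, ?_⟩, hc.2.symm, ?_⟩
            · show pvG grid p.1 (p.2 + 1) 0 ≠ bg
              rw [hc.2]; exact hbg
            · unfold pvAdj; left; exact ⟨rfl, Or.inl rfl⟩
          · unfold pvIdx at hA ⊢
            omega
          · unfold pvIdx at hB ⊢
            show b = p.1 * cols + (p.2 + 1)
            omega
        · rw [if_neg hc] at hmem'
          simp at hmem'
      · by_cases hc : p.1 + 1 < rows ∧ pvG grid (p.1 + 1) p.2 0 = pvG grid p.1 p.2 0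
        · rw [if_pos hc] at hmem'
          simp only [List.mem_singleton, Prod.mk.injEq] at hmem'
          obtain ⟨hA, hB⟩ := hmem'
          refine ⟨p, (p.1 + 1, p.2), ?_, Or.inr rfl, ?_, ?_⟩
          · refine ⟨hokp, ⟨by omega, hc.1, h3, h4, ?_⟩, hc.2.symm, ?_⟩
            · show pvG grid (p.1 + 1) p.2 0 ≠ bg
              rw [hc.2]; exact hbg
            · unfold pvAdj; right; exact ⟨rfl, Or.inl rfl⟩
          · unfold pvIdx at hA ⊢
            omega
          · unfold pvIdx at hB ⊢
            show b = (p.1 + 1) * cols + p.2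
            have hx : (p.1 + 1) * cols = p.1 * cols + cols := by ring
            omega
        · rw [if_neg hc] at hmem'
          simp at hmem'
  · rintro ⟨p, q, hE, hdir, ha, hb⟩
    obtain ⟨hokp, hokq, hval, _⟩ := hE
    refine ⟨p, pvMem_allCells.2 ⟨hokp.1, hokp.2.1, hokp.2.2.1, hokp.2.2.2.1⟩, ?_⟩
    rw [if_neg hokp.2.2.2.2]
    rcases hdir with hq | hq
    · apply List.mem_append.2
      left
      have hcond : p.2 + 1 < cols ∧ pvG grid p.1 (p.2 + 1) 0 = pvG grid p.1 p.2 0 := by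
        constructor
        · have := hokq.2.2.2.1; rw [hq] at this; exact this
        · have := hval.symm; rw [hq] at this; exact this
      rw [if_pos hcond]
      simp only [List.mem_singleton, Prod.mk.injEq]
      rw [hq] at hb
      unfold pvIdx at ha hb ⊢
      constructor
      · omega
      · show b = p.1 * cols + p.2 + 1
        have hb' : b = p.1 * cols + (p.2 + 1) := hb
        omega
    · apply List.mem_append.2
      right
      have hcond : p.1 + 1 < rows ∧ pvG grid (p.1 + 1) p.2 0 = pvG grid p.1 p.2 0 := by
        constructor
        · have := hokq.2.1; rw [hq] at this; exact this
        · have := hval.symm; rw [hq] at this; exact this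
      rw [if_pos hcond]
      simp only [List.mem_singleton, Prod.mk.injEq]
      rw [hq] at hb
      unfold pvIdx at ha hb ⊢
      constructor
      · omega
      · show b = p.1 * cols + p.2 + cols
        have hb' : b = (p.1 + 1) * cols + p.2 := hb
        have hx : (p.1 + 1) * cols = p.1 * cols + cols := by ring
        omega
  
theorem pvE_to_eqv {grid : List (List Int)} {rows cols bg : Int} {x y : Int × Int}
    (hE : pvE grid rows cols bg x y) :
    Relation.EqvGen (fun u w => (u, w) ∈ pvOps grid rows cols bg)
      (pvIdx cols x) (pvIdx cols y) := by
  have hadj := hE.2.2.2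
  unfold pvAdj at hadj
  rcases hadj with ⟨h1, h2 | h2⟩ | ⟨h1, h2 | h2⟩
  · have hy : y = (x.1, x.2 + 1) := by
      apply Prod.ext
      · exact h1.symm
      · exact h2
    exact Relation.EqvGen.rel _ _ (pvOps_mem.2 ⟨x, y, hE, Or.inl hy, rfl, rfl⟩)
  · have hx : x = (y.1, y.2 + 1) := by
      apply Prod.ext
      · exact h1
      · exact h2
    exact Relation.EqvGen.symm _ _ (Relation.EqvGen.rel _ _
      (pvOps_mem.2 ⟨y, x, pvE_symm grid rows cols bg hE, Or.inl hx, rfl, rfl⟩))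
  · have hy : y = (x.1 + 1, x.2) := by
      apply Prod.ext
      · exact h2
      · exact h1.symm
    exact Relation.EqvGen.rel _ _ (pvOps_mem.2 ⟨x, y, hE, Or.inr hy, rfl, rfl⟩)
  · have hx : x = (y.1 + 1, y.2) := by
      apply Prod.ext
      · exact h2
      · exact h1
    exact Relation.EqvGen.symm _ _ (Relation.EqvGen.rel _ _
      (pvOps_mem.2 ⟨y, x, pvE_symm grid rows cols bg hE, Or.inr hx, rfl, rfl⟩))

theorem pvConn_to_eqv {grid : List (List Int)} {rows cols bg : Int} {p q : Int × Int}
    (h : pvConn grid rows cols bg p q) :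
    Relation.EqvGen (fun u w => (u, w) ∈ pvOps grid rows cols bg)
      (pvIdx cols p) (pvIdx cols q) := by
  induction h with
  | refl => exact Relation.EqvGen.refl _
  | tail _ he ih => exact Relation.EqvGen.trans _ _ _ ih (pvE_to_eqv he)

theorem pvEqv_to_conn {grid : List (List Int)} {rows cols bg : Int} {a b : Int}
    (h : Relation.EqvGen (fun u w => (u, w) ∈ pvOps grid rows cols bg) a b) :
    a = b ∨ ∃ p q, pvOk grid rows cols bg p ∧ pvOk grid rows cols bg q ∧
      pvIdx cols p = a ∧ pvIdx cols q = b ∧ pvConn grid rows cols bg p q := by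
  induction h with
  | rel u w hb =>
    obtain ⟨p, q, hE, _, hu, hw⟩ := pvOps_mem.1 hb
    exact Or.inr ⟨p, q, hE.1, hE.2.1, hu.symm, hw.symm,
      Relation.ReflTransGen.single hE⟩
  | refl => exact Or.inl rfl
  | symm x y _ ih =>
    rcases ih with h' | ⟨p, q, h1, h2, h3, h4, h5⟩
    · exact Or.inl h'.symm
    · exact Or.inr ⟨q, p, h2, h1, h4, h3, pvConn_symm grid rows cols bg h5⟩
  | trans x z y _ _ ih1 ih2 =>
    rcases ih1 with h1 | ⟨p1, q1, hok1, hok1', hi1, hi1', hc1⟩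
    · rcases ih2 with h2 | h2
      · exact Or.inl (h1.trans h2)
      · rw [h1]; exact Or.inr h2
    · rcases ih2 with h2 | ⟨p2, q2, hok2, hok2', hi2, hi2', hc2⟩
      · rw [← h2]; exact Or.inr ⟨p1, q1, hok1, hok1', hi1, hi1', hc1⟩
      · have hqp : q1 = p2 := by
          apply pvIdx_inj hok1'.2.2.1 hok1'.2.2.2.1 hok2.2.2.1 hok2.2.2.2.1
          rw [hi1', hi2]
        refine Or.inr ⟨p1, q2, hok1, hok2', hi1, hi2', ?_⟩
        rw [hqp] at hc1
        exact Relation.ReflTransGen.trans hc1 hc2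

-- B's union pass is a fold of unions over the edge list
theorem pvCellUnion_eq (grid : List (List Int)) (rows cols bg : Int) (par : List Int)
    (r c : Int) :
    (let v := pvG grid r c 0
     if v = bg then par
     else
       let par1 := if c + 1 < cols ∧ pvG grid r (c + 1) 0 = v then
           ufUnion par (r * cols + c) (r * cols + c + 1) else par
       if r + 1 < rows ∧ pvG grid (r + 1) c 0 = v then
           ufUnion par1 (r * cols + c) ((r + 1) * cols + c) else par1) =
    ((if pvG grid r c 0 = bg then ([] : List (Int × Int))
      else
        (if c + 1 < cols ∧ pvG grid r (c + 1) 0 = pvG grid r c 0 then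
          [(pvIdx cols (r, c), pvIdx cols (r, c) + 1)] else []) ++
        (if r + 1 < rows ∧ pvG grid (r + 1) c 0 = pvG grid r c 0 then
          [(pvIdx cols (r, c), pvIdx cols (r, c) + cols)] else [])).foldl
      (fun par e => ufUnion par e.1 e.2) par) := by
  by_cases hbg : pvG grid r c 0 = bg
  · simp [hbg]
  · simp only [if_neg hbg]
    rw [show pvIdx cols (r, c) = r * cols + c from rfl]
    rw [show r * cols + c + cols = (r + 1) * cols + c from by ring]
    by_cases h1 : c + 1 < cols ∧ pvG grid r (c + 1) 0 = pvG grid r c 0 <;>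
      by_cases h2 : r + 1 < rows ∧ pvG grid (r + 1) c 0 = pvG grid r c 0 <;>
      simp [h1, h2]

theorem pvUnionPass_eq_fold (grid : List (List Int)) (rows cols bg : Int) :
    pvUnionPass grid rows cols bg =
      (pvOps grid rows cols bg).foldl (fun par e => ufUnion par e.1 e.2)
        (PySem.List.pyRange 0 (rows * cols) 1) := by
  unfold pvUnionPass pvOps pvAllCells
  rw [List.foldl_flatMap, List.foldl_flatMap]
  apply PySem.List.foldl_congr_mem'
  intro r _ par
  rw [List.foldl_map]
  apply PySem.List.foldl_congr_mem'
  intro c _ par'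
  exact pvCellUnion_eq grid rows cols bg par' r c

theorem pvParent0 (n : Int) :
    (PySem.List.pyRange 0 n 1).length = n.toNat ∧
    pvUFGood (PySem.List.pyRange 0 n 1) (fun _ _ => False) := by
  have hlen : (PySem.List.pyRange 0 n 1).length = n.toNat := by
    rw [PySem.List.length_pyRange_one]
    simp
  have hpar0 : ∀ i, pvInR (PySem.List.pyRange 0 n 1) i →
      pvPar (PySem.List.pyRange 0 n 1) i = i := by
    intro i hi
    obtain ⟨hi1, hi2⟩ := hi
    rw [hlen] at hi2
    unfold pvPar
    have hmap : PySem.List.pyRange 0 n 1 = (PySem.List.pyRange 0 n 1).map (fun x => x) := by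
      simp
    rw [hmap, PySem.List.pyGetD_map_pyRange_of_nonneg (fun x => x) n i 0 hi1 (by omega)]
  refine ⟨hlen, ?_, ?_, ?_⟩
  · intro i hi
    rw [hpar0 i hi]
    exact ⟨hi.1, le_refl i⟩
  · intro i hi
    rw [hpar0 i hi]
    exact Relation.EqvGen.refl i
  · intro x y h
    rw [pvEqvGen_false h]

theorem pvUF_final (grid : List (List Int)) (rows cols bg : Int)
    (_hrows : 0 ≤ rows) (_hcols : 0 ≤ cols) :
    (pvUnionPass grid rows cols bg).length = (rows * cols).toNat ∧
    pvUFGood (pvUnionPass grid rows cols bg)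
      (fun u w => (u, w) ∈ pvOps grid rows cols bg) := by
  rw [pvUnionPass_eq_fold]
  obtain ⟨hlen0, hgood0⟩ := pvParent0 (rows * cols)
  have hops : ∀ e ∈ pvOps grid rows cols bg,
      pvInR (PySem.List.pyRange 0 (rows * cols) 1) e.1 ∧
      pvInR (PySem.List.pyRange 0 (rows * cols) 1) e.2 := by
    intro e he
    have he' : (e.1, e.2) ∈ pvOps grid rows cols bg := he
    obtain ⟨p, q, hE, _, ha, hb⟩ := pvOps_mem.1 he'
    obtain ⟨hp1, hp2⟩ := pvIdx_bound hE.1.1 hE.1.2.1 hE.1.2.2.1 hE.1.2.2.2.1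
    obtain ⟨hq1, hq2⟩ := pvIdx_bound hE.2.1.1 hE.2.1.2.1 hE.2.1.2.2.1 hE.2.1.2.2.2.1
    constructor
    · exact ⟨by omega, by rw [hlen0]; omega⟩
    · exact ⟨by omega, by rw [hlen0]; omega⟩
  obtain ⟨hlen, hgood⟩ := pvUF_fold (pvOps grid rows cols bg) _ _ hgood0
    (by rintro u w ⟨⟩) hops
  refine ⟨hlen.trans hlen0, pvUFGood_congr (fun u w => by simp) hgood⟩

theorem pvRootMin (grid : List (List Int)) (rows cols bg : Int)
    (hrows : 0 ≤ rows) (hcols : 0 ≤ cols) {p : Int × Int}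
    (hok : pvOk grid rows cols bg p) :
    ∃ s, pvOk grid rows cols bg s ∧ pvConn grid rows cols bg p s ∧
      pvRoot (pvUnionPass grid rows cols bg) (pvIdx cols p) = pvIdx cols s ∧
      (∀ q, pvConn grid rows cols bg p q → pvIdx cols s ≤ pvIdx cols q) := by
  obtain ⟨hlen, hgood⟩ := pvUF_final grid rows cols bg hrows hcols
  have hin : ∀ {x : Int × Int}, pvOk grid rows cols bg x →
      pvInR (pvUnionPass grid rows cols bg) (pvIdx cols x) := by
    intro x hx
    obtain ⟨h1, h2⟩ := pvIdx_bound hx.1 hx.2.1 hx.2.2.1 hx.2.2.2.1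
    have : 0 ≤ rows * cols := mul_nonneg hrows hcols
    exact ⟨h1, by rw [hlen]; omega⟩
  have hminprop : ∀ q, pvConn grid rows cols bg p q →
      pvRoot (pvUnionPass grid rows cols bg) (pvIdx cols p) ≤ pvIdx cols q := by
    intro q hq
    have hokq := pvConn_ok grid rows cols bg hok hq
    have heq := hgood.2.2 _ _ (pvConn_to_eqv hq)
    obtain ⟨_, hle⟩ := pvRoot_range _ hgood.1 (hin hokq)
    omega
  have hrel := pvRoot_relEqv _ _ hgood (pvIdx cols p).toNat _ (hin hok) (le_refl _)
  rcases pvEqv_to_conn hrel with heq | ⟨s, q', hoks, hokq', his, hiq', hconn⟩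
  · refine ⟨p, hok, Relation.ReflTransGen.refl, heq, ?_⟩
    intro q hq
    have := hminprop q hq
    omega
  · have hq'p : q' = p :=
      pvIdx_inj hokq'.2.2.1 hokq'.2.2.2.1 hok.2.2.1 hok.2.2.2.1 hiq'
    rw [hq'p] at hconn
    refine ⟨s, hoks, pvConn_symm grid rows cols bg hconn, his.symm, ?_⟩
    intro q hq
    have := hminprop q hq
    omega

theorem pvRoot_eq_iff_conn (grid : List (List Int)) (rows cols bg : Int)
    (hrows : 0 ≤ rows) (hcols : 0 ≤ cols) {p q : Int × Int}
    (hokp : pvOk grid rows cols bg p) (hokq : pvOk grid rows cols bg q) :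
    pvRoot (pvUnionPass grid rows cols bg) (pvIdx cols p) =
      pvRoot (pvUnionPass grid rows cols bg) (pvIdx cols q) ↔
    pvConn grid rows cols bg p q := by
  obtain ⟨hlen, hgood⟩ := pvUF_final grid rows cols bg hrows hcols
  constructor
  · intro h
    obtain ⟨sp, hoksp, hcp, hrp, _⟩ := pvRootMin grid rows cols bg hrows hcols hokp
    obtain ⟨sq, hoksq, hcq, hrq, _⟩ := pvRootMin grid rows cols bg hrows hcols hokq
    have hseq : sp = sq := by
      apply pvIdx_inj hoksp.2.2.1 hoksp.2.2.2.1 hoksq.2.2.1 hoksq.2.2.2.1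
      rw [← hrp, ← hrq, h]
    rw [hseq] at hcp
    exact Relation.ReflTransGen.trans hcp (pvConn_symm grid rows cols bg hcq)
  · intro h
    exact hgood.2.2 _ _ (pvConn_to_eqv h)

theorem pvRoot_start_iff (grid : List (List Int)) (rows cols bg : Int)
    (hrows : 0 ≤ rows) (hcols : 0 ≤ cols) {p : Int × Int}
    (hok : pvOk grid rows cols bg p) :
    pvRoot (pvUnionPass grid rows cols bg) (pvIdx cols p) = pvIdx cols p ↔
    (∀ q, pvConn grid rows cols bg p q → pvIdx cols p ≤ pvIdx cols q) := by
  obtain ⟨s, hoks, hconn, hroot, hmin⟩ := pvRootMin grid rows cols bg hrows hcols hok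
  constructor
  · intro h q hq
    rw [h] at hroot
    have hsp : s = p :=
      pvIdx_inj hoks.2.2.1 hoks.2.2.2.1 hok.2.2.1 hok.2.2.2.1 hroot.symm
    rw [← hsp]
    exact hmin q hq
  · intro h
    have h1 : pvIdx cols p ≤ pvIdx cols s := h s hconn
    have h2 : pvIdx cols s ≤ pvIdx cols p := hmin p Relation.ReflTransGen.refl
    omega

-- ---- row-major scan order ----
theorem pvFoldl_prefix {α β : Type} (l : List β) (f : α → β → α) (P : List β → α → Prop)
    (hstep : ∀ l1 x l2, l = l1 ++ x :: l2 → ∀ s, P l1 s → P (l1 ++ [x]) (f s x)) :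
    ∀ init, P [] init → P l (l.foldl f init) := by
  suffices h : ∀ l2 l1 s, l = l1 ++ l2 → P l1 s → P l (l2.foldl f s) by
    intro init h0
    exact h l [] init rfl h0
  intro l2
  induction l2 with
  | nil =>
    intro l1 s hl hP
    rw [List.append_nil] at hl
    subst hl
    exact hP
  | cons x t ih =>
    intro l1 s hl hP
    simp only [List.foldl_cons]
    exact ih (l1 ++ [x]) (f s x) (by rw [hl]; simp) (hstep l1 x t hl s hP)

theorem pvPyRange_pairwise (b : Int) : ∀ (n : Nat) (a : Int), (b - a).toNat = n →
    (PySem.List.pyRange a b 1).Pairwise (· < ·) := by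
  intro n
  induction n with
  | zero =>
    intro a hn
    rw [PySem.List.pyRange_one_eq_nil (by omega)]
    exact List.Pairwise.nil
  | succ k ih =>
    intro a hn
    rw [PySem.List.pyRange_one_cons (by omega)]
    refine List.pairwise_cons.2 ⟨?_, ih (a + 1) (by omega)⟩
    intro y hy
    have := (PySem.List.mem_pyRange_one.1 hy).1
    omega

theorem pvAllCells_pairwise (rows cols : Int) :
    (pvAllCells rows cols).Pairwise (fun p q => pvIdx cols p < pvIdx cols q) := by
  unfold pvAllCells
  rw [List.pairwise_flatMap]
  constructor
  · intro r hr
    rw [List.pairwise_map]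
    refine List.Pairwise.imp ?_ (pvPyRange_pairwise cols (cols - 0).toNat 0 rfl)
    intro c c' h
    unfold pvIdx
    simp only
    omega
  · refine List.Pairwise.imp ?_ (pvPyRange_pairwise rows (rows - 0).toNat 0 rfl)
    intro r r' h x hx y hy
    rw [List.mem_map] at hx hy
    obtain ⟨c, hc, hx'⟩ := hx
    obtain ⟨c', hc', hy'⟩ := hy
    obtain ⟨hc1, hc2⟩ := PySem.List.mem_pyRange_one.1 hc
    obtain ⟨hc1', hc2'⟩ := PySem.List.mem_pyRange_one.1 hc'
    rw [← hx', ← hy']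
    unfold pvIdx
    simp only
    have : (r + 1) * cols ≤ r' * cols := mul_le_mul_of_nonneg_right (by omega) (by omega)
    rw [add_mul, one_mul] at this
    omega

theorem pvAllCells_nodup (rows cols : Int) : (pvAllCells rows cols).Nodup := by
  refine List.Pairwise.imp ?_ (pvAllCells_pairwise rows cols)
  intro p q h heq
  rw [heq] at h
  exact lt_irrefl _ h

theorem pvAllCells_split {rows cols : Int} {l1 : List (Int × Int)} {x : Int × Int}
    {l2 : List (Int × Int)} (h : pvAllCells rows cols = l1 ++ x :: l2) :
    (0 ≤ x.1 ∧ x.1 < rows ∧ 0 ≤ x.2 ∧ x.2 < cols) ∧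
    (∀ q, 0 ≤ q.1 → q.1 < rows → 0 ≤ q.2 → q.2 < cols →
      (q ∈ l1 ↔ pvIdx cols q < pvIdx cols x)) := by
  have hx : x ∈ pvAllCells rows cols := by rw [h]; simp
  refine ⟨pvMem_allCells.1 hx, ?_⟩
  intro q h1 h2 h3 h4
  have hpw := pvAllCells_pairwise rows cols
  rw [h] at hpw
  rw [List.pairwise_append] at hpw
  constructor
  · intro hq
    exact hpw.2.2 q hq x (by simp)
  · intro hlt
    have hqmem : q ∈ l1 ++ x :: l2 := by
      rw [← h]
      exact pvMem_allCells.2 ⟨h1, h2, h3, h4⟩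
    rcases List.mem_append.1 hqmem with h' | h'
    · exact h'
    · rcases List.mem_cons.1 h' with h'' | h''
      · rw [h''] at hlt
        exact absurd hlt (lt_irrefl _)
      · have hxq : pvIdx cols x < pvIdx cols q := (List.pairwise_cons.1 hpw.2.1).1 q h''
        omega

-- ---- region starts ----
def pvStartP (grid : List (List Int)) (rows cols bg : Int) (p : Int × Int) : Prop :=
  pvOk grid rows cols bg p ∧
  ∀ q, pvConn grid rows cols bg p q → pvIdx cols p ≤ pvIdx cols q

def pvStartB (grid : List (List Int)) (cols bg : Int) (parentF : List Int)
    (p : Int × Int) : Bool :=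
  (pvG grid p.1 p.2 0 != bg) && (pvRoot parentF (pvIdx cols p) == pvIdx cols p)

theorem pvStartB_iff (grid : List (List Int)) (rows cols bg : Int)
    (hrows : 0 ≤ rows) (hcols : 0 ≤ cols) {p : Int × Int}
    (h1 : 0 ≤ p.1) (h2 : p.1 < rows) (h3 : 0 ≤ p.2) (h4 : p.2 < cols) :
    pvStartB grid cols bg (pvUnionPass grid rows cols bg) p = true ↔
      pvStartP grid rows cols bg p := by
  unfold pvStartB pvStartP
  by_cases hbg : pvG grid p.1 p.2 0 = bg
  · simp [hbg, pvOk]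
  · have hok : pvOk grid rows cols bg p := ⟨h1, h2, h3, h4, hbg⟩
    rw [show (pvG grid p.1 p.2 0 != bg) = true from by simp [hbg]]
    rw [Bool.true_and, beq_iff_eq]
    rw [pvRoot_start_iff grid rows cols bg hrows hcols hok]
    exact ⟨fun h => ⟨hok, h⟩, fun h => h.2⟩

-- ---- the grouping fold shared by both region dictionaries ----
def pvGroupStep (d : PySem.Dict Int (List (List (Int × Int)))) (v : Int)
    (cl : List (Int × Int)) : PySem.Dict Int (List (List (Int × Int))) :=
  (d.setdefault v []).modify v [] (· ++ [cl])

def pvGroupDict (grid : List (List Int)) (L : List ((Int × Int) × List (Int × Int))) :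
    PySem.Dict Int (List (List (Int × Int))) :=
  L.foldl (fun d e => pvGroupStep d (pvG grid e.1.1 e.1.2 0) e.2) PySem.Dict.empty

theorem pvAOp_eq_groupStep (d : PySem.Dict Int (List (List (Int × Int)))) (v : Int)
    (cl : List (Int × Int)) :
    (if d.contains v then d else d.insert v []).modify v [] (· ++ [cl]) =
      pvGroupStep d v cl := by
  unfold pvGroupStep
  by_cases h : d.contains v = true
  · rw [if_pos h, PySem.Dict.setdefault_of_contains d [] h]
  · rw [if_neg (by simpa using h),
      PySem.Dict.setdefault_of_not_contains d [] (by simpa using h)]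

theorem pvVis0_rep (rows cols : Int) :
    pvVisRep rows cols
      ((PySem.List.pyRange 0 rows 1).map (fun _ => List.replicate cols.toNat false))
      (fun _ => False) := by
  constructor
  · constructor
    · rw [List.length_map, PySem.List.length_pyRange_one]
      simp
    · intro row hrow
      rw [List.mem_map] at hrow
      obtain ⟨_, _, hr⟩ := hrow
      rw [← hr, List.length_replicate]
  · intro r c hr0 hr hc0 hc
    have hrN : r.toNat < ((PySem.List.pyRange 0 rows 1).map
        (fun _ => List.replicate cols.toNat false)).length := by
      rw [List.length_map, PySem.List.length_pyRange_one]
      omega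
    unfold pvG
    rw [PySem.List.pyGetD_eq_getElem _ [] hr0
      (by rw [List.length_map, PySem.List.length_pyRange_one]; omega)]
    rw [List.getElem_map]
    rw [PySem.List.pyGetD_eq_getElem _ false hc0
      (by rw [List.length_replicate]; omega)]
    simp

-- ---- A's scan as a fold over the cell list, and its characterisation ----
theorem pvScanA_as_fold (grid : List (List Int)) (rows cols bg : Int) :
    pvScanA grid rows cols bg =
      (pvAllCells rows cols).foldl (fun st p => pvCellStepA grid rows cols bg st p.1 p.2)
        ((PySem.List.pyRange 0 rows 1).map (fun _ => List.replicate cols.toNat false),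
          PySem.Dict.empty) := by
  unfold pvScanA pvAllCells
  rw [List.foldl_flatMap]
  apply PySem.List.foldl_congr_mem'
  intro r _ st
  rw [List.foldl_map]

def pvAInv (grid : List (List Int)) (rows cols bg : Int) (pref : List (Int × Int))
    (st : List (List Bool) × PySem.Dict Int (List (List (Int × Int)))) : Prop :=
  pvVisRep rows cols st.1
    (fun q => pvOk grid rows cols bg q ∧ ∃ x ∈ pref, pvConn grid rows cols bg q x) ∧
  ∃ L, st.2 = pvGroupDict grid L ∧
    L.map Prod.fst = pref.filter (pvStartB grid cols bg (pvUnionPass grid rows cols bg)) ∧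
    ∀ e ∈ L, pvStartP grid rows cols bg e.1 ∧ e.2.Nodup ∧
      (∀ q, q ∈ e.2 ↔ pvConn grid rows cols bg e.1 q)

theorem pvScanA_step (grid : List (List Int)) (rows cols bg : Int)
    (hrows : 0 ≤ rows) (hcols : 0 ≤ cols) :
    ∀ (l1 : List (Int × Int)) (x : Int × Int) (l2 : List (Int × Int)),
      pvAllCells rows cols = l1 ++ x :: l2 →
      ∀ st, pvAInv grid rows cols bg l1 st →
        pvAInv grid rows cols bg (l1 ++ [x])
          (pvCellStepA grid rows cols bg st x.1 x.2) := by
  intro l1 x l2 hsplit st hP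
  obtain ⟨⟨hb1, hb2, hb3, hb4⟩, hprefc⟩ := pvAllCells_split hsplit
  obtain ⟨hrep, L, hdict, hmap, hprops⟩ := hP
  have hVclosed : ∀ p q,
      (fun q => pvOk grid rows cols bg q ∧ ∃ x' ∈ l1, pvConn grid rows cols bg q x') p →
      pvE grid rows cols bg p q →
      (fun q => pvOk grid rows cols bg q ∧ ∃ x' ∈ l1, pvConn grid rows cols bg q x') q := by
    rintro p q ⟨hokp, x', hx', hc⟩ hE
    exact ⟨hE.2.1, x', hx',
      Relation.ReflTransGen.head (pvE_symm grid rows cols bg hE) hc⟩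
  unfold pvCellStepA
  by_cases hguard : pvG st.1 x.1 x.2 false = false ∧ pvG grid x.1 x.2 0 ≠ bg
  · rw [if_pos hguard]
    have hok : pvOk grid rows cols bg x := ⟨hb1, hb2, hb3, hb4, hguard.2⟩
    have hnV : ¬ (pvOk grid rows cols bg x ∧
        ∃ x' ∈ l1, pvConn grid rows cols bg x x') := by
      intro hV
      have := (hrep.2 x.1 x.2 hb1 hb2 hb3 hb4).2 (by exact hV)
      rw [hguard.1] at this
      exact Bool.false_ne_true this
    have hstart : pvStartP grid rows cols bg x := by
      refine ⟨hok, ?_⟩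
      intro q hq
      by_contra hlt
      have hokq := pvConn_ok grid rows cols bg hok hq
      have hqmem : q ∈ l1 := (hprefc q hokq.1 hokq.2.1 hokq.2.2.1 hokq.2.2.2.1).2 (by omega)
      exact hnV ⟨hok, q, hqmem, hq⟩
    obtain ⟨hrep', hnd', hmem', _⟩ :=
      pvRegion_sem grid rows cols bg _ hVclosed x hok hnV st.1 hrep
    constructor
    · refine pvVisRep_congr hrep' ?_
      intro q
      constructor
      · rintro (hV | hc)
        · obtain ⟨hokq, x', hx', hcq⟩ := hV
          exact ⟨hokq, x', by simp [hx'], hcq⟩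
        · refine ⟨pvConn_ok grid rows cols bg hok hc, x, by simp, ?_⟩
          exact pvConn_symm grid rows cols bg hc
      · rintro ⟨hokq, x', hx', hcq⟩
        rcases List.mem_append.1 hx' with h' | h'
        · exact Or.inl ⟨hokq, x', h', hcq⟩
        · rw [List.mem_singleton] at h'
          rw [h'] at hcq
          exact Or.inr (pvConn_symm grid rows cols bg hcq)
    · refine ⟨L ++ [(x, (pvBfsA grid rows cols (pvG grid x.1 x.2 0)
        (pvUnvis (pvS st.1 x.1 x.2 true) + 1) (pvS st.1 x.1 x.2 true)
        [(x.1, x.2)] [(x.1, x.2)]).2)], ?_, ?_, ?_⟩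
      · show (if st.2.contains (pvG grid x.1 x.2 0) then st.2
          else st.2.insert (pvG grid x.1 x.2 0) []).modify (pvG grid x.1 x.2 0) []
            (· ++ [_]) = _
        rw [pvAOp_eq_groupStep, hdict]
        unfold pvGroupDict
        rw [List.foldl_append]
        simp only [List.foldl_cons, List.foldl_nil]
      · rw [List.map_append, hmap, List.filter_append]
        simp only [List.map_cons, List.map_nil, List.filter_cons, List.filter_nil]
        rw [if_pos ((pvStartB_iff grid rows cols bg hrows hcols hb1 hb2 hb3 hb4).2 hstart)]
      · intro e he
        rcases List.mem_append.1 he with h' | h'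
        · exact hprops e h'
        · rw [List.mem_singleton] at h'
          rw [h']
          exact ⟨hstart, hnd', hmem'⟩
  · rw [if_neg hguard]
    have hVeq : ∀ q,
        (pvOk grid rows cols bg q ∧ ∃ x' ∈ l1 ++ [x], pvConn grid rows cols bg q x') ↔
        (pvOk grid rows cols bg q ∧ ∃ x' ∈ l1, pvConn grid rows cols bg q x') := by
      intro q
      constructor
      · rintro ⟨hokq, x', hx', hcq⟩
        rcases List.mem_append.1 hx' with h' | h'
        · exact ⟨hokq, x', h', hcq⟩
        · rw [List.mem_singleton] at h'
          rw [h'] at hcq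
          by_cases hbg : pvG grid x.1 x.2 0 = bg
          · exfalso
            rcases (Relation.ReflTransGen.cases_tail hcq) with h'' | ⟨c, _, hE⟩
            · rw [h''] at hbg
              exact hokq.2.2.2.2 hbg
            · exact hE.2.1.2.2.2.2 hbg
          · have hbit : pvG st.1 x.1 x.2 false = true := by
              rcases Bool.eq_false_or_eq_true (pvG st.1 x.1 x.2 false) with h'' | h''
              · exact h''
              · exact absurd ⟨h'', hbg⟩ hguard
            obtain ⟨hokx, x'', hx'', hcx⟩ := (hrep.2 x.1 x.2 hb1 hb2 hb3 hb4).1 hbit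
            exact ⟨hokq, x'', hx'', Relation.ReflTransGen.trans hcq hcx⟩
      · rintro ⟨hokq, x', hx', hcq⟩
        exact ⟨hokq, x', by simp [hx'], hcq⟩
    have hstartF : pvStartB grid cols bg (pvUnionPass grid rows cols bg) x = false := by
      by_cases hbg : pvG grid x.1 x.2 0 = bg
      · unfold pvStartB
        simp [hbg]
      · have hbit : pvG st.1 x.1 x.2 false = true := by
          rcases Bool.eq_false_or_eq_true (pvG st.1 x.1 x.2 false) with h'' | h''
          · exact h''
          · exact absurd ⟨h'', hbg⟩ hguard
        obtain ⟨hokx, x'', hx'', hcx⟩ := (hrep.2 x.1 x.2 hb1 hb2 hb3 hb4).1 hbit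
        have hlt : pvIdx cols x'' < pvIdx cols x := by
          have hokx'' := pvConn_ok grid rows cols bg hokx hcx
          exact (hprefc x'' hokx''.1 hokx''.2.1 hokx''.2.2.1 hokx''.2.2.2.1).1 hx''
        have hnstart : ¬ pvStartP grid rows cols bg x := by
          rintro ⟨_, hmin⟩
          have := hmin x'' hcx
          omega
        rcases Bool.eq_false_or_eq_true
            (pvStartB grid cols bg (pvUnionPass grid rows cols bg) x) with h'' | h''
        · exact absurd ((pvStartB_iff grid rows cols bg hrows hcols hb1 hb2 hb3 hb4).1 h'')
            hnstart
        · exact h''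
    refine ⟨pvVisRep_congr hrep (fun q => (hVeq q).symm), L, hdict, ?_, hprops⟩
    rw [List.filter_append, hmap]
    simp only [List.filter_cons, List.filter_nil, hstartF]
    simp

theorem pvScanA_sem (grid : List (List Int)) (rows cols bg : Int)
    (hrows : 0 ≤ rows) (hcols : 0 ≤ cols) :
    ∃ L, (pvScanA grid rows cols bg).2 = pvGroupDict grid L ∧
      L.map Prod.fst = (pvAllCells rows cols).filter
        (pvStartB grid cols bg (pvUnionPass grid rows cols bg)) ∧
      ∀ e ∈ L, pvStartP grid rows cols bg e.1 ∧ e.2.Nodup ∧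
        (∀ q, q ∈ e.2 ↔ pvConn grid rows cols bg e.1 q) := by
  rw [pvScanA_as_fold]
  have hinit : pvAInv grid rows cols bg []
      ((PySem.List.pyRange 0 rows 1).map (fun _ => List.replicate cols.toNat false),
        PySem.Dict.empty) := by
    constructor
    · refine pvVisRep_congr (pvVis0_rep rows cols) ?_
      intro q
      simp
    · exact ⟨[], rfl, rfl, by simp⟩
  have := pvFoldl_prefix (pvAllCells rows cols)
    (fun st p => pvCellStepA grid rows cols bg st p.1 p.2)
    (pvAInv grid rows cols bg)
    (fun l1 x l2 hs s hP => pvScanA_step grid rows cols bg hrows hcols l1 x l2 hs s hP)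
    _ hinit
  exact this.2

-- ---- B's bucketing pass ----
def pvMemB (grid : List (List Int)) (cols bg : Int) (parentF : List Int)
    (s q : Int × Int) : Bool :=
  (pvG grid q.1 q.2 0 != bg) && (pvRoot parentF (pvIdx cols q) == pvIdx cols s)

theorem pvBucket_as_fold (grid : List (List Int)) (rows cols bg : Int)
    (parent : List Int) :
    pvBucket grid rows cols bg parent =
      (pvAllCells rows cols).foldl (fun d p =>
        if pvG grid p.1 p.2 0 = bg then d
        else
          (d.setdefault (ufFind parent parent.length (pvIdx cols p)) []).modify
            (ufFind parent parent.length (pvIdx cols p)) [] (· ++ [p]))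
        PySem.Dict.empty := by
  unfold pvBucket pvAllCells
  rw [List.foldl_flatMap]
  apply PySem.List.foldl_congr_mem'
  intro r _ st
  rw [List.foldl_map]
  apply PySem.List.foldl_congr_mem'
  intro c _ d
  rfl

def pvBInv (grid : List (List Int)) (rows cols bg : Int) (pref : List (Int × Int))
    (d : PySem.Dict Int (List (Int × Int))) : Prop :=
  d.items = (pref.filter (pvStartB grid cols bg (pvUnionPass grid rows cols bg))).map
    (fun s => (pvIdx cols s,
      pref.filter (pvMemB grid cols bg (pvUnionPass grid rows cols bg) s)))

theorem pvBucket_step (grid : List (List Int)) (rows cols bg : Int)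
    (hrows : 0 ≤ rows) (hcols : 0 ≤ cols) :
    ∀ (l1 : List (Int × Int)) (x : Int × Int) (l2 : List (Int × Int)),
      pvAllCells rows cols = l1 ++ x :: l2 →
      ∀ d, pvBInv grid rows cols bg l1 d →
        pvBInv grid rows cols bg (l1 ++ [x])
          (if pvG grid x.1 x.2 0 = bg then d
           else
             (d.setdefault (ufFind (pvUnionPass grid rows cols bg)
                 (pvUnionPass grid rows cols bg).length (pvIdx cols x)) []).modify
               (ufFind (pvUnionPass grid rows cols bg)
                 (pvUnionPass grid rows cols bg).length (pvIdx cols x)) []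
               (· ++ [x])) := by
  intro l1 x l2 hsplit d hI
  obtain ⟨⟨hb1, hb2, hb3, hb4⟩, hprefc⟩ := pvAllCells_split hsplit
  have hl1b : ∀ q ∈ l1, 0 ≤ q.1 ∧ q.1 < rows ∧ 0 ≤ q.2 ∧ q.2 < cols := by
    intro q hq
    exact pvMem_allCells.1 (by rw [hsplit]; exact List.mem_append.2 (Or.inl hq))
  obtain ⟨hlenF, hgoodF⟩ := pvUF_final grid rows cols bg hrows hcols
  unfold pvBInv at hI ⊢
  by_cases hbg : pvG grid x.1 x.2 0 = bg
  · rw [if_pos hbg, hI]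
    have hsbx : pvStartB grid cols bg (pvUnionPass grid rows cols bg) x = false := by
      unfold pvStartB
      simp [hbg]
    rw [List.filter_append, List.filter_cons, hsbx]
    simp only [Bool.false_eq_true, if_false, List.filter_nil, List.append_nil]
    apply List.map_congr_left
    intro s _
    rw [List.filter_append, List.filter_cons]
    rw [show pvMemB grid cols bg (pvUnionPass grid rows cols bg) s x = false from by
      unfold pvMemB; simp [hbg]]
    simp
  · rw [if_neg hbg]
    have hok : pvOk grid rows cols bg x := ⟨hb1, hb2, hb3, hb4, hbg⟩
    have hinx : pvInR (pvUnionPass grid rows cols bg) (pvIdx cols x) := by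
      obtain ⟨hx1, hx2⟩ := pvIdx_bound hb1 hb2 hb3 hb4
      have : (0 : Int) ≤ rows * cols := mul_nonneg hrows hcols
      exact ⟨hx1, by rw [hlenF]; omega⟩
    have hfind : ufFind (pvUnionPass grid rows cols bg)
        (pvUnionPass grid rows cols bg).length (pvIdx cols x) =
        pvRoot (pvUnionPass grid rows cols bg) (pvIdx cols x) := by
      apply pvRoot_fuel _ hgoodF.1 hinx
      obtain ⟨h1, h2⟩ := hinx
      omega
    rw [hfind]
    obtain ⟨s0, hoks0, hconn0, hroot0, hmin0⟩ := pvRootMin grid rows cols bg hrows hcols hok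
    have hkeynodup : ∀ s ∈ l1.filter (pvStartB grid cols bg (pvUnionPass grid rows cols bg)),
        pvIdx cols s < pvIdx cols x := by
      intro s hs
      have hs1 := List.mem_of_mem_filter hs
      obtain ⟨hq1, hq2, hq3, hq4⟩ := hl1b s hs1
      exact (hprefc s hq1 hq2 hq3 hq4).1 hs1
    by_cases hxs : pvRoot (pvUnionPass grid rows cols bg) (pvIdx cols x) = pvIdx cols x
    · -- x starts a new component
      have hsbx : pvStartB grid cols bg (pvUnionPass grid rows cols bg) x = true := by
        unfold pvStartB
        simp [hbg, hxs]
      have hnotmem : d.contains (pvIdx cols x) = false := by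
        rcases Bool.eq_false_or_eq_true (d.contains (pvIdx cols x)) with h' | h'
        · exfalso
          rw [PySem.Dict.contains_iff_mem_keys] at h'
          unfold PySem.Dict.keys at h'
          rw [hI, List.map_map, List.mem_map] at h'
          obtain ⟨s, hs, hks⟩ := h'
          have := hkeynodup s hs
          simp only [Function.comp] at hks
          omega
        · exact h'
      rw [hxs]
      have hL : ((d.setdefault (pvIdx cols x) []).modify (pvIdx cols x) []
          (· ++ [x])) = d.insert (pvIdx cols x) [x] := by
        rw [PySem.Dict.setdefault_of_not_contains d [] hnotmem]
        unfold PySem.Dict.modify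
        rw [PySem.Dict.getD_insert_self]
        rw [PySem.Dict.insert_insert_self]
        rfl
      rw [hL, PySem.Dict.items_insert_of_not_contains d [x] hnotmem, hI]
      rw [List.filter_append, List.filter_cons, hsbx]
      simp only [if_true, List.filter_nil, List.map_append, List.map_cons, List.map_nil]
      congr 1
      · apply List.map_congr_left
        intro s hs
        have hlt := hkeynodup s hs
        rw [List.filter_append, List.filter_cons]
        rw [show pvMemB grid cols bg (pvUnionPass grid rows cols bg) s x = false from by
          unfold pvMemB
          rw [hxs]
          simp only [Bool.and_eq_false_iff]
          right
          simp only [beq_eq_false_iff_ne, ne_eq]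
          omega]
        simp
      · rw [List.filter_append, List.filter_cons]
        rw [show pvMemB grid cols bg (pvUnionPass grid rows cols bg) x x = true from by
          unfold pvMemB
          rw [hxs]
          simp [hbg]]
        rw [show l1.filter (pvMemB grid cols bg (pvUnionPass grid rows cols bg) x) = []
          from ?_]
        · simp
        · rw [List.filter_eq_nil_iff]
          intro q hq hmq
          unfold pvMemB at hmq
          rw [Bool.and_eq_true, bne_iff_ne, beq_iff_eq] at hmq
          obtain ⟨hq1, hq2, hq3, hq4⟩ := hl1b q hq
          have hokq : pvOk grid rows cols bg q := ⟨hq1, hq2, hq3, hq4, hmq.1⟩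
          obtain ⟨sq, hoksq, hconnq, hrootq, hminq⟩ :=
            pvRootMin grid rows cols bg hrows hcols hokq
          have hsqx : sq = x := by
            apply pvIdx_inj hoksq.2.2.1 hoksq.2.2.2.1 hb3 hb4
            rw [← hrootq, hmq.2]
          have hle : pvIdx cols sq ≤ pvIdx cols q := hminq q Relation.ReflTransGen.refl
          have hqlt : pvIdx cols q < pvIdx cols x := (hprefc q hq1 hq2 hq3 hq4).1 hq
          rw [hsqx] at hle
          omega
    · -- x joins the component of its root s0
      have hs0lt : pvIdx cols s0 < pvIdx cols x := by
        have h1 : pvIdx cols s0 ≤ pvIdx cols x := hmin0 x Relation.ReflTransGen.refl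
        rcases lt_or_eq_of_le h1 with h' | h'
        · exact h'
        · exact absurd (by rw [hroot0, h']) hxs
      have hs0mem : s0 ∈ l1 :=
        (hprefc s0 hoks0.1 hoks0.2.1 hoks0.2.2.1 hoks0.2.2.2.1).2 hs0lt
      have hsb0 : pvStartB grid cols bg (pvUnionPass grid rows cols bg) s0 = true := by
        unfold pvStartB
        rw [Bool.and_eq_true, bne_iff_ne, beq_iff_eq]
        refine ⟨hoks0.2.2.2.2, ?_⟩
        rw [(pvRoot_eq_iff_conn grid rows cols bg hrows hcols hoks0 hok).2
          (pvConn_symm grid rows cols bg hconn0), hroot0]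
      have hs0filt : s0 ∈ l1.filter (pvStartB grid cols bg (pvUnionPass grid rows cols bg)) :=
        List.mem_filter.2 ⟨hs0mem, hsb0⟩
      have hkeysnd : d.keys.Nodup := by
        unfold PySem.Dict.keys
        rw [hI, List.map_map]
        have hpw : (l1.filter (pvStartB grid cols bg
            (pvUnionPass grid rows cols bg))).Pairwise
            (fun p q => pvIdx cols p < pvIdx cols q) := by
          apply List.Pairwise.filter
          have hpwall := pvAllCells_pairwise rows cols
          rw [hsplit, List.pairwise_append] at hpwall
          exact hpwall.1
        have hpw2 : (List.map (Prod.fst ∘ fun s => (pvIdx cols s,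
            l1.filter (pvMemB grid cols bg (pvUnionPass grid rows cols bg) s)))
            (l1.filter (pvStartB grid cols bg (pvUnionPass grid rows cols bg)))).Pairwise
            (fun a b => a < b) := by
          rw [List.pairwise_map]
          refine List.Pairwise.imp ?_ hpw
          intro a b h
          exact h
        refine List.Pairwise.imp ?_ hpw2
        intro a b h heq
        rw [heq] at h
        exact lt_irrefl _ h
      have hentry : (pvIdx cols s0,
          l1.filter (pvMemB grid cols bg (pvUnionPass grid rows cols bg) s0)) ∈ d.items := by
        rw [hI, List.mem_map]
        exact ⟨s0, hs0filt, rfl⟩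
      have hcont : d.contains (pvIdx cols s0) = true := by
        rw [PySem.Dict.contains_iff_mem_keys]
        unfold PySem.Dict.keys
        exact List.mem_map.2 ⟨_, hentry, rfl⟩
      have hgetD : d.getD (pvIdx cols s0) [] =
          l1.filter (pvMemB grid cols bg (pvUnionPass grid rows cols bg) s0) :=
        PySem.Dict.getD_of_mem_items d hentry hkeysnd []
      rw [hroot0, PySem.Dict.setdefault_of_contains d [] hcont]
      show (d.modify (pvIdx cols s0) [] (· ++ [x])).items = _
      unfold PySem.Dict.modify
      rw [hgetD, PySem.Dict.items_insert_of_contains d _ hcont, hI, List.map_map]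
      have hsbx : pvStartB grid cols bg (pvUnionPass grid rows cols bg) x = false := by
        unfold pvStartB
        rw [Bool.and_eq_false_iff]
        right
        rw [beq_eq_false_iff_ne]
        exact hxs
      rw [List.filter_append, List.filter_cons, hsbx]
      simp only [Bool.false_eq_true, if_false, List.filter_nil, List.append_nil]
      apply List.map_congr_left
      intro s hs
      have hsb := (List.mem_filter.1 hs).2
      have hsmem := List.mem_of_mem_filter hs
      obtain ⟨hq1, hq2, hq3, hq4⟩ := hl1b s hsmem
      simp only [Function.comp]
      by_cases hss0 : s = s0
      · subst hss0
        rw [if_pos (by simp)]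
        rw [List.filter_append, List.filter_cons]
        rw [show pvMemB grid cols bg (pvUnionPass grid rows cols bg) s x = true from by
          unfold pvMemB
          rw [hroot0]
          simp [hbg]]
        simp
      · have hne : pvIdx cols s ≠ pvIdx cols s0 := by
          intro heq
          exact hss0 (pvIdx_inj hq3 hq4 hoks0.2.2.1 hoks0.2.2.2.1 heq)
        rw [if_neg (by simpa using hne)]
        rw [List.filter_append, List.filter_cons]
        rw [show pvMemB grid cols bg (pvUnionPass grid rows cols bg) s x = false from by
          unfold pvMemB
          rw [hroot0, Bool.and_eq_false_iff]
          right
          rw [beq_eq_false_iff_ne]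
          omega]
        simp

theorem pvBucket_sem (grid : List (List Int)) (rows cols bg : Int)
    (hrows : 0 ≤ rows) (hcols : 0 ≤ cols) :
    (pvBucket grid rows cols bg (pvUnionPass grid rows cols bg)).items =
      ((pvAllCells rows cols).filter
        (pvStartB grid cols bg (pvUnionPass grid rows cols bg))).map
        (fun s => (pvIdx cols s, (pvAllCells rows cols).filter
          (pvMemB grid cols bg (pvUnionPass grid rows cols bg) s))) := by
  rw [pvBucket_as_fold]
  exact pvFoldl_prefix (pvAllCells rows cols) _ (pvBInv grid rows cols bg)
    (fun l1 x l2 hs d hI => pvBucket_step grid rows cols bg hrows hcols l1 x l2 hs d hI)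
    PySem.Dict.empty (by unfold pvBInv; simp [PySem.Dict.empty])

-- ---- B's grouping pass ----
theorem pvCC_head (grid : List (List Int)) (rows cols bg : Int)
    (hrows : 0 ≤ rows) (hcols : 0 ≤ cols) {s : Int × Int}
    (hsmem : s ∈ (pvAllCells rows cols).filter
      (pvStartB grid cols bg (pvUnionPass grid rows cols bg))) :
    ∃ t, (pvAllCells rows cols).filter
      (pvMemB grid cols bg (pvUnionPass grid rows cols bg) s) = s :: t := by
  have hsb := (List.mem_filter.1 hsmem).2
  have hsall := List.mem_of_mem_filter hsmem
  obtain ⟨hb1, hb2, hb3, hb4⟩ := pvMem_allCells.1 hsall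
  have hstart : pvStartP grid rows cols bg s :=
    (pvStartB_iff grid rows cols bg hrows hcols hb1 hb2 hb3 hb4).1 hsb
  have hroots : pvRoot (pvUnionPass grid rows cols bg) (pvIdx cols s) = pvIdx cols s := by
    unfold pvStartB at hsb
    rw [Bool.and_eq_true, beq_iff_eq] at hsb
    exact hsb.2
  have hsCC : s ∈ (pvAllCells rows cols).filter
      (pvMemB grid cols bg (pvUnionPass grid rows cols bg) s) := by
    refine List.mem_filter.2 ⟨hsall, ?_⟩
    unfold pvMemB
    rw [Bool.and_eq_true, bne_iff_ne, beq_iff_eq]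
    exact ⟨hstart.1.2.2.2.2, hroots⟩
  cases hCC : (pvAllCells rows cols).filter
      (pvMemB grid cols bg (pvUnionPass grid rows cols bg) s) with
  | nil =>
    rw [hCC] at hsCC
    exact absurd hsCC (List.not_mem_nil)
  | cons h t =>
    refine ⟨t, ?_⟩
    have hhmem : h ∈ (pvAllCells rows cols).filter
        (pvMemB grid cols bg (pvUnionPass grid rows cols bg) s) := by
      rw [hCC]; simp
    have hhb := (List.mem_filter.1 hhmem).2
    unfold pvMemB at hhb
    rw [Bool.and_eq_true, bne_iff_ne, beq_iff_eq] at hhb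
    obtain ⟨hh1, hh2, hh3, hh4⟩ := pvMem_allCells.1 (List.mem_of_mem_filter hhmem)
    have hokh : pvOk grid rows cols bg h := ⟨hh1, hh2, hh3, hh4, hhb.1⟩
    have hconnh : pvConn grid rows cols bg h s := by
      apply (pvRoot_eq_iff_conn grid rows cols bg hrows hcols hokh hstart.1).1
      rw [hhb.2, hroots]
    have hles : pvIdx cols s ≤ pvIdx cols h :=
      hstart.2 h (pvConn_symm grid rows cols bg hconnh)
    have hpwf : ((pvAllCells rows cols).filter
        (pvMemB grid cols bg (pvUnionPass grid rows cols bg) s)).Pairwise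
        (fun p q => pvIdx cols p < pvIdx cols q) :=
      List.Pairwise.filter _ (pvAllCells_pairwise rows cols)
    rw [hCC, List.pairwise_cons] at hpwf
    rw [hCC] at hsCC
    rcases List.mem_cons.1 hsCC with h' | h'
    · rw [h']
    · have := hpwf.1 s h'
      omega

theorem pvCC_mem (grid : List (List Int)) (rows cols bg : Int)
    (hrows : 0 ≤ rows) (hcols : 0 ≤ cols) {s : Int × Int}
    (hstart : pvStartP grid rows cols bg s) (q : Int × Int) :
    q ∈ (pvAllCells rows cols).filter
      (pvMemB grid cols bg (pvUnionPass grid rows cols bg) s) ↔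
    pvConn grid rows cols bg s q := by
  have hroots : pvRoot (pvUnionPass grid rows cols bg) (pvIdx cols s) = pvIdx cols s :=
    (pvRoot_start_iff grid rows cols bg hrows hcols hstart.1).2 hstart.2
  constructor
  · intro hq
    have hqb := (List.mem_filter.1 hq).2
    unfold pvMemB at hqb
    rw [Bool.and_eq_true, bne_iff_ne, beq_iff_eq] at hqb
    obtain ⟨hq1, hq2, hq3, hq4⟩ := pvMem_allCells.1 (List.mem_of_mem_filter hq)
    have hokq : pvOk grid rows cols bg q := ⟨hq1, hq2, hq3, hq4, hqb.1⟩
    apply pvConn_symm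
    apply (pvRoot_eq_iff_conn grid rows cols bg hrows hcols hokq hstart.1).1
    rw [hqb.2, hroots]
  · intro hc
    have hokq := pvConn_ok grid rows cols bg hstart.1 hc
    refine List.mem_filter.2 ⟨pvMem_allCells.2 ⟨hokq.1, hokq.2.1, hokq.2.2.1,
      hokq.2.2.2.1⟩, ?_⟩
    unfold pvMemB
    rw [Bool.and_eq_true, bne_iff_ne, beq_iff_eq]
    refine ⟨hokq.2.2.2.2, ?_⟩
    rw [(pvRoot_eq_iff_conn grid rows cols bg hrows hcols hokq hstart.1).2
      (pvConn_symm grid rows cols bg hc), hroots]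

theorem pvGroupB_sem (grid : List (List Int)) (rows cols bg : Int)
    (hrows : 0 ≤ rows) (hcols : 0 ≤ cols) :
    pvGroup grid (pvBucket grid rows cols bg (pvUnionPass grid rows cols bg)) =
      pvGroupDict grid (((pvAllCells rows cols).filter
        (pvStartB grid cols bg (pvUnionPass grid rows cols bg))).map
        (fun s => (s, (pvAllCells rows cols).filter
          (pvMemB grid cols bg (pvUnionPass grid rows cols bg) s)))) := by
  unfold pvGroup pvGroupDict
  have hvals : (pvBucket grid rows cols bg (pvUnionPass grid rows cols bg)).values =
      ((pvAllCells rows cols).filter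
        (pvStartB grid cols bg (pvUnionPass grid rows cols bg))).map
        (fun s => (pvAllCells rows cols).filter
          (pvMemB grid cols bg (pvUnionPass grid rows cols bg) s)) := by
    unfold PySem.Dict.values
    rw [pvBucket_sem grid rows cols bg hrows hcols, List.map_map]
    rfl
  rw [hvals, List.foldl_map, List.foldl_map]
  apply PySem.List.foldl_congr_mem'
  intro s hs d
  obtain ⟨t, hCC⟩ := pvCC_head grid rows cols bg hrows hcols hs
  show (let p0 := PySem.List.pyGetD ((pvAllCells rows cols).filter
      (pvMemB grid cols bg (pvUnionPass grid rows cols bg) s)) 0 ((0 : Int), (0 : Int))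
    let v := pvG grid p0.1 p0.2 0
    (d.setdefault v []).modify v [] (· ++ [(pvAllCells rows cols).filter
      (pvMemB grid cols bg (pvUnionPass grid rows cols bg) s)])) = _
  rw [hCC]
  simp only [PySem.List.pyGetD_zero_cons]
  rfl

-- ---- the two region dictionaries are pointwise permutations of each other ----
theorem pvLA_rel (grid : List (List Int)) (rows cols bg : Int)
    (hrows : 0 ≤ rows) (hcols : 0 ≤ cols) :
    ∀ (L : List ((Int × Int) × List (Int × Int))),
      (∀ e ∈ L, pvStartP grid rows cols bg e.1 ∧ e.2.Nodup ∧
        (∀ q, q ∈ e.2 ↔ pvConn grid rows cols bg e.1 q)) →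
      List.Forall₂ (fun eA eB => eA.1 = eB.1 ∧ eA.2.Perm eB.2) L
        (L.map (fun e => (e.1, (pvAllCells rows cols).filter
          (pvMemB grid cols bg (pvUnionPass grid rows cols bg) e.1)))) := by
  intro L
  induction L with
  | nil => intro _; exact List.Forall₂.nil
  | cons e t ih =>
    intro hprops
    obtain ⟨hstart, hnd, hmem⟩ := hprops e (by simp)
    refine List.Forall₂.cons ⟨rfl, ?_⟩ (ih (fun e' he' => hprops e' (by simp [he'])))
    rw [List.perm_ext_iff_of_nodup hnd (List.Nodup.filter _ (pvAllCells_nodup rows cols))]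
    intro q
    rw [hmem q, pvCC_mem grid rows cols bg hrows hcols hstart q]

-- the dictionary relation: equal keys, pointwise-permuted region lists
def pvDR (d d' : PySem.Dict Int (List (List (Int × Int)))) : Prop :=
  List.Forall₂ (fun p p' => p.1 = p'.1 ∧ List.Forall₂ List.Perm p.2 p'.2) d.items d'.items

theorem pvF2_append {α β : Type} {R : α → β → Prop} {l1 u1 : List α} {l2 u2 : List β}
    (h1 : List.Forall₂ R l1 l2) (h2 : List.Forall₂ R u1 u2) :
    List.Forall₂ R (l1 ++ u1) (l2 ++ u2) := by
  induction h1 with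
  | nil => exact h2
  | cons hR _ ih => exact List.Forall₂.cons hR ih

theorem pvDR_keys {d d' : PySem.Dict Int (List (List (Int × Int)))} (h : pvDR d d') :
    d.keys = d'.keys := by
  obtain ⟨items⟩ := d
  obtain ⟨items'⟩ := d'
  unfold pvDR at h
  simp only at h
  unfold PySem.Dict.keys
  simp only
  induction h with
  | nil => rfl
  | cons hR _ ih =>
    simp only [List.map_cons]
    rw [hR.1, ih]

theorem pvDR_get? {d d' : PySem.Dict Int (List (List (Int × Int)))} (h : pvDR d d')
    (k : Int) :
    (d.get? k = none ∧ d'.get? k = none) ∨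
    (∃ v v', d.get? k = some v ∧ d'.get? k = some v' ∧ List.Forall₂ List.Perm v v') := by
  obtain ⟨items⟩ := d
  obtain ⟨items'⟩ := d'
  unfold pvDR at h
  simp only at h
  induction h with
  | nil => exact Or.inl ⟨rfl, rfl⟩
  | @cons p p' t t' hR htail ih =>
    rw [show PySem.Dict.mk (p :: t) = PySem.Dict.mk (p :: t) from rfl]
    by_cases hk : (p.1 == k) = true
    · refine Or.inr ⟨p.2, p'.2, ?_, ?_, hR.2⟩
      · rw [show (PySem.Dict.mk (p :: t)).get? k =
          if p.1 == k then some p.2 else (PySem.Dict.mk t).get? k from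
          PySem.Dict.get?_mk_cons p.1 p.2 t k, if_pos hk]
      · rw [show (PySem.Dict.mk (p' :: t')).get? k =
          if p'.1 == k then some p'.2 else (PySem.Dict.mk t').get? k from
          PySem.Dict.get?_mk_cons p'.1 p'.2 t' k, if_pos (by rw [← hR.1]; exact hk)]
    · have h1 : (PySem.Dict.mk (p :: t)).get? k = (PySem.Dict.mk t).get? k := by
        rw [show (PySem.Dict.mk (p :: t)).get? k =
          if p.1 == k then some p.2 else (PySem.Dict.mk t).get? k from
          PySem.Dict.get?_mk_cons p.1 p.2 t k, if_neg hk]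
      have h2 : (PySem.Dict.mk (p' :: t')).get? k = (PySem.Dict.mk t').get? k := by
        rw [show (PySem.Dict.mk (p' :: t')).get? k =
          if p'.1 == k then some p'.2 else (PySem.Dict.mk t').get? k from
          PySem.Dict.get?_mk_cons p'.1 p'.2 t' k, if_neg (by rw [← hR.1]; exact hk)]
      rw [h1, h2]
      exact ih

theorem pvDR_groupStep {d d' : PySem.Dict Int (List (List (Int × Int)))} (h : pvDR d d')
    (v : Int) {cl cl' : List (Int × Int)} (hcl : cl.Perm cl') :
    pvDR (pvGroupStep d v cl) (pvGroupStep d' v cl') := by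
  have hcont : d.contains v = d'.contains v := by
    rw [PySem.Dict.contains_eq_decide_mem_keys, PySem.Dict.contains_eq_decide_mem_keys,
      pvDR_keys h]
  unfold pvGroupStep
  by_cases hc : d.contains v = true
  · have hc' : d'.contains v = true := by rw [← hcont]; exact hc
    rw [PySem.Dict.setdefault_of_contains d [] hc,
      PySem.Dict.setdefault_of_contains d' [] hc']
    unfold PySem.Dict.modify
    rcases pvDR_get? h v with ⟨h1, _⟩ | ⟨w, w', h1, h2, hww⟩
    · exfalso
      rw [PySem.Dict.contains_eq_isSome_get?, h1] at hc
      simp at hc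
    · have hg1 : d.getD v [] = w := PySem.Dict.getD_of_get?_eq_some d [] h1
      have hg2 : d'.getD v [] = w' := PySem.Dict.getD_of_get?_eq_some d' [] h2
      rw [hg1, hg2]
      unfold pvDR
      rw [PySem.Dict.items_insert_of_contains d _ hc,
        PySem.Dict.items_insert_of_contains d' _ hc']
      have hmap : ∀ (its : List (Int × List (List (Int × Int))))
          (its' : List (Int × List (List (Int × Int)))),
          List.Forall₂ (fun p p' => p.1 = p'.1 ∧ List.Forall₂ List.Perm p.2 p'.2) its its' →
          List.Forall₂ (fun p p' => p.1 = p'.1 ∧ List.Forall₂ List.Perm p.2 p'.2)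
            (its.map (fun p => if (p.1 == v) = true then (v, w ++ [cl]) else p))
            (its'.map (fun p => if (p.1 == v) = true then (v, w' ++ [cl']) else p)) := by
        intro its its' hits
        induction hits with
        | nil => exact List.Forall₂.nil
        | @cons p p' t t' hR htail ih =>
          simp only [List.map_cons]
          refine List.Forall₂.cons ?_ ih
          by_cases hk : (p.1 == v) = true
          · rw [if_pos hk, if_pos (by rw [← hR.1]; exact hk)]
            exact ⟨rfl, pvF2_append hww (List.Forall₂.cons hcl List.Forall₂.nil)⟩
          · rw [if_neg hk, if_neg (by rw [← hR.1]; exact hk)]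
            exact hR
      exact hmap d.items d'.items h
  · have hc' : d'.contains v = false := by
      rw [← hcont]
      simpa using hc
    rw [PySem.Dict.setdefault_of_not_contains d [] (by simpa using hc),
      PySem.Dict.setdefault_of_not_contains d' [] hc']
    unfold PySem.Dict.modify
    rw [PySem.Dict.getD_insert_self, PySem.Dict.getD_insert_self,
      PySem.Dict.insert_insert_self, PySem.Dict.insert_insert_self]
    unfold pvDR
    rw [PySem.Dict.items_insert_of_not_contains d _ (by simpa using hc),
      PySem.Dict.items_insert_of_not_contains d' _ hc']
    exact pvF2_append h (List.Forall₂.cons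
      ⟨rfl, List.Forall₂.cons hcl List.Forall₂.nil⟩ List.Forall₂.nil)

-- ---- the drawing phase only sees each region up to permutation ----
theorem pvInsertBy_rel :
    ∀ {acc acc' : List (List (Int × Int))}, List.Forall₂ List.Perm acc acc' →
    ∀ {x x' : List (Int × Int)}, x.Perm x' →
    List.Forall₂ List.Perm
      (PySem.List.insertBy
        (fun a b => decide (-(PySem.List.len a) < -(PySem.List.len b))) x acc)
      (PySem.List.insertBy
        (fun a b => decide (-(PySem.List.len a) < -(PySem.List.len b))) x' acc') := by
  intro acc acc' h
  induction h with
  | nil =>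
    intro x x' hx
    exact List.Forall₂.cons hx List.Forall₂.nil
  | @cons y y' t t' hy htail ih =>
    intro x x' hx
    have hcmp : (decide (-(PySem.List.len x) < -(PySem.List.len y))) =
        (decide (-(PySem.List.len x') < -(PySem.List.len y'))) := by
      simp [PySem.List.len_eq, hx.length_eq, hy.length_eq]
    show List.Forall₂ List.Perm
      (if decide (-(PySem.List.len x) < -(PySem.List.len y)) then x :: y :: t
       else y :: PySem.List.insertBy _ x t) _
    rw [show (PySem.List.insertBy
        (fun a b => decide (-(PySem.List.len a) < -(PySem.List.len b))) x' (y' :: t')) =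
      (if decide (-(PySem.List.len x') < -(PySem.List.len y')) then x' :: y' :: t'
       else y' :: PySem.List.insertBy
        (fun a b => decide (-(PySem.List.len a) < -(PySem.List.len b))) x' t') from rfl]
    rw [hcmp]
    by_cases hc : (decide (-(PySem.List.len x') < -(PySem.List.len y'))) = true
    · rw [if_pos hc, if_pos hc]
      exact List.Forall₂.cons hx (List.Forall₂.cons hy htail)
    · rw [if_neg hc, if_neg hc]
      exact List.Forall₂.cons hy (ih hx)

theorem pvSorted_rel {rl rl' : List (List (Int × Int))}
    (h : List.Forall₂ List.Perm rl rl') :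
    List.Forall₂ List.Perm
      (PySem.List.sorted rl (fun x => -(PySem.List.len x)))
      (PySem.List.sorted rl' (fun x => -(PySem.List.len x))) := by
  rw [PySem.List.sorted_eq_foldl_insertBy, PySem.List.sorted_eq_foldl_insertBy]
  suffices hgen : ∀ {l l' : List (List (Int × Int))}, List.Forall₂ List.Perm l l' →
      ∀ {acc acc'}, List.Forall₂ List.Perm acc acc' →
      List.Forall₂ List.Perm
        (l.foldl (fun acc x => PySem.List.insertBy
          (fun a b => decide (-(PySem.List.len a) < -(PySem.List.len b))) x acc) acc)
        (l'.foldl (fun acc x => PySem.List.insertBy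
          (fun a b => decide (-(PySem.List.len a) < -(PySem.List.len b))) x acc) acc') by
    exact hgen h List.Forall₂.nil
  intro l l' hll
  induction hll with
  | nil => exact fun hacc => hacc
  | cons hx _ ih =>
    intro acc acc' hacc
    exact ih (pvInsertBy_rel hacc hx)

theorem pvMin_eq {l1 l2 : List Int} (hmem : ∀ x, x ∈ l1 ↔ x ∈ l2) :
    PySem.List.min? l1 (fun x => x) = PySem.List.min? l2 (fun x => x) := by
  cases h1 : PySem.List.min? l1 (fun x => x) with
  | none =>
    rw [PySem.List.min?_eq_none_iff] at h1
    symm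
    rw [PySem.List.min?_eq_none_iff]
    cases h2 : l2 with
    | nil => rfl
    | cons a t =>
      exfalso
      have : a ∈ l1 := (hmem a).2 (by rw [h2]; simp)
      rw [h1] at this
      exact absurd this (List.not_mem_nil)
  | some m =>
    cases h2 : PySem.List.min? l2 (fun x => x) with
    | none =>
      rw [PySem.List.min?_eq_none_iff] at h2
      have : m ∈ l2 := (hmem m).1 (PySem.List.min?_mem h1)
      rw [h2] at this
      exact absurd this (List.not_mem_nil)
    | some m' =>
      have hm : m ∈ l2 := (hmem m).1 (PySem.List.min?_mem h1)
      have hm' : m' ∈ l1 := (hmem m').2 (PySem.List.min?_mem h2)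
      have h3 : m' ≤ m := PySem.List.min?_isMin h2 m hm
      have h4 : m ≤ m' := PySem.List.min?_isMin h1 m' hm'
      rw [le_antisymm h4 h3]

theorem pvMax_eq {l1 l2 : List Int} (hmem : ∀ x, x ∈ l1 ↔ x ∈ l2) :
    PySem.List.max? l1 (fun x => x) = PySem.List.max? l2 (fun x => x) := by
  cases h1 : PySem.List.max? l1 (fun x => x) with
  | none =>
    rw [PySem.List.max?_eq_none_iff] at h1
    symm
    rw [PySem.List.max?_eq_none_iff]
    cases h2 : l2 with
    | nil => rfl
    | cons a t =>
      exfalso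
      have : a ∈ l1 := (hmem a).2 (by rw [h2]; simp)
      rw [h1] at this
      exact absurd this (List.not_mem_nil)
  | some m =>
    cases h2 : PySem.List.max? l2 (fun x => x) with
    | none =>
      rw [PySem.List.max?_eq_none_iff] at h2
      have : m ∈ l2 := (hmem m).1 (PySem.List.max?_mem h1)
      rw [h2] at this
      exact absurd this (List.not_mem_nil)
    | some m' =>
      have hm : m ∈ l2 := (hmem m).1 (PySem.List.max?_mem h1)
      have hm' : m' ∈ l1 := (hmem m').2 (PySem.List.max?_mem h2)
      have h3 : m ≤ m' := PySem.List.max?_isMax h2 m hm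
      have h4 : m' ≤ m := PySem.List.max?_isMax h1 m' hm'
      rw [le_antisymm h3 h4]

theorem pvBbox_eq {SA SB : List (Int × Int)} (hmem : ∀ z, z ∈ SA ↔ z ∈ SB) :
    pvBbox SA = pvBbox SB := by
  have h1 : ∀ a : Int, a ∈ SA.map (·.1) ↔ a ∈ SB.map (·.1) := by
    intro a
    simp only [List.mem_map]
    constructor
    · rintro ⟨z, hz, rfl⟩
      exact ⟨z, (hmem z).1 hz, rfl⟩
    · rintro ⟨z, hz, rfl⟩
      exact ⟨z, (hmem z).2 hz, rfl⟩
  have h2 : ∀ a : Int, a ∈ SA.map (·.2) ↔ a ∈ SB.map (·.2) := by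
    intro a
    simp only [List.mem_map]
    constructor
    · rintro ⟨z, hz, rfl⟩
      exact ⟨z, (hmem z).1 hz, rfl⟩
    · rintro ⟨z, hz, rfl⟩
      exact ⟨z, (hmem z).2 hz, rfl⟩
  unfold pvBbox
  rw [pvMin_eq h1, pvMax_eq h1, pvMin_eq h2, pvMax_eq h2]

theorem pvContains_eq {SA SB : List (Int × Int)} (hmem : ∀ z, z ∈ SA ↔ z ∈ SB)
    (z : Int × Int) : SA.contains z = SB.contains z := by
  cases hA : SA.contains z with
  | false =>
    cases hB : SB.contains z with
    | false => rfl
    | true =>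
      exfalso
      have : z ∈ SA := (hmem z).2 (List.contains_iff_mem.1 hB)
      rw [List.contains_iff_mem.2 this] at hA
      simp at hA
  | true =>
    cases hB : SB.contains z with
    | false =>
      exfalso
      have : z ∈ SB := (hmem z).1 (List.contains_iff_mem.1 hA)
      rw [List.contains_iff_mem.2 this] at hB
      simp at hB
    | true => rfl

theorem pvTrace_congr (rows cols : Int) {SA SB : PySem.Set (Int × Int)}
    (hc : ∀ z, SA.contains z = SB.contains z) (dr dc : Int) :
    ∀ (fuel : Nat) (r c : Int) (path : List (Int × Int)),
      pvTrace rows cols SA dr dc fuel r c path =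
      pvTrace rows cols SB dr dc fuel r c path := by
  intro fuel
  induction fuel with
  | zero => intro r c path; rfl
  | succ n ih =>
    intro r c path
    simp only [pvTrace]
    rw [hc (r + dr, c + dc)]
    split_ifs
    all_goals first | rfl | exact ih _ _ _

theorem pvDraw_congr (rows cols bg v : Int) {SA SB : PySem.Set (Int × Int)}
    (hc : ∀ z, SA.contains z = SB.contains z) (bb : Int × Int × Int × Int)
    (res : List (List Int)) (st : Int × Int) :
    pvDraw rows cols bg v SA bb res st = pvDraw rows cols bg v SB bb res st := by
  simp only [pvDraw, pvTrace_congr rows cols hc]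

-- the post-guard body of pvItemStep, as a function of the sorted region list
def pvItemBody (rows cols bg v : Int) (s : List (List (Int × Int)))
    (res : List (List Int)) : List (List Int) :=
  let block := PySem.List.pyGetD s 0 []
  let bcells : PySem.Set (Int × Int) := PySem.Set.ofList block
  (PySem.List.slice s (some 1) none).foldl (fun res cells =>
    if PySem.List.len cells ≠ 1 then res
    else pvDraw rows cols bg v bcells (pvBbox bcells) res
      (PySem.List.pyGetD cells 0 (0, 0))) res

theorem pvItemBody_congr (rows cols bg v : Int) {sA sB : List (List (Int × Int))}
    (hs : List.Forall₂ List.Perm sA sB) (res : List (List Int)) :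
    pvItemBody rows cols bg v sA res = pvItemBody rows cols bg v sB res := by
  have hblock : (PySem.List.pyGetD sA 0 []).Perm (PySem.List.pyGetD sB 0 []) := by
    cases hs with
    | nil => exact List.Perm.refl _
    | cons hy _ =>
      rw [PySem.List.pyGetD_zero_cons, PySem.List.pyGetD_zero_cons]
      exact hy
  have hmemS : ∀ z, z ∈ PySem.Set.ofList (PySem.List.pyGetD sA 0 []) ↔
      z ∈ PySem.Set.ofList (PySem.List.pyGetD sB 0 []) := by
    intro z
    rw [PySem.Set.mem_ofList, PySem.Set.mem_ofList]
    exact hblock.mem_iff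
  have hcont := pvContains_eq hmemS
  have hbb := pvBbox_eq hmemS
  show (PySem.List.slice sA (some 1) none).foldl (fun res cells =>
      if PySem.List.len cells ≠ 1 then res
      else pvDraw rows cols bg v (PySem.Set.ofList (PySem.List.pyGetD sA 0 []))
        (pvBbox (PySem.Set.ofList (PySem.List.pyGetD sA 0 []))) res
        (PySem.List.pyGetD cells 0 (0, 0))) res =
    (PySem.List.slice sB (some 1) none).foldl (fun res cells =>
      if PySem.List.len cells ≠ 1 then res
      else pvDraw rows cols bg v (PySem.Set.ofList (PySem.List.pyGetD sB 0 []))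
        (pvBbox (PySem.Set.ofList (PySem.List.pyGetD sB 0 []))) res
        (PySem.List.pyGetD cells 0 (0, 0))) res
  rw [PySem.List.slice_from_one, PySem.List.slice_from_one, hbb]
  have htails : List.Forall₂ List.Perm sA.tail sB.tail := by
    cases hs with
    | nil => exact List.Forall₂.nil
    | cons _ ht => exact ht
  clear hs hblock hbb
  revert htails
  generalize sA.tail = tA
  generalize sB.tail = tB
  intro htails
  induction htails generalizing res with
  | nil => rfl
  | @cons c c' t t' hcc htail ih =>
    simp only [List.foldl_cons]
    have hclen : PySem.List.len c = PySem.List.len c' := by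
      simp [PySem.List.len_eq, hcc.length_eq]
    by_cases h1 : PySem.List.len c' ≠ 1
    · rw [show (if PySem.List.len c ≠ 1 then res else _) = res from by
        rw [if_pos (by rw [hclen]; exact h1)]]
      rw [show (if PySem.List.len c' ≠ 1 then res else _) = res from by
        rw [if_pos h1]]
      exact ih res
    · have h1' : PySem.List.len c' = 1 := by omega
      have hlc : c'.length = 1 := by
        have := h1'
        rw [PySem.List.len_eq] at this
        exact_mod_cast this
      obtain ⟨a, ha⟩ := List.length_eq_one_iff.1 hlc
      have hca : c = [a] := by
        rw [ha] at hcc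
        exact List.perm_singleton.1 hcc
      rw [show (if PySem.List.len c ≠ 1 then res else _) = _ from by
        rw [if_neg (by rw [hclen]; omega)]]
      rw [show (if PySem.List.len c' ≠ 1 then res else _) = _ from by
        rw [if_neg (by omega)]]
      rw [hca, ha]
      rw [pvDraw_congr rows cols bg v hcont _ res _]
      exact ih _

theorem pvItemStep_congr (rows cols bg : Int) (res : List (List Int)) (k : Int)
    {rlA rlB : List (List (Int × Int))} (h : List.Forall₂ List.Perm rlA rlB) :
    pvItemStep rows cols bg res (k, rlA) = pvItemStep rows cols bg res (k, rlB) := by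
  unfold pvItemStep
  have hlen2 : PySem.List.len rlA = PySem.List.len rlB := by
    simp [PySem.List.len_eq, h.length_eq]
  show (if PySem.List.len rlA < 2 then res else _) =
    (if PySem.List.len rlB < 2 then res else _)
  rw [hlen2]
  by_cases hshort : PySem.List.len rlB < 2
  · rw [if_pos hshort, if_pos hshort]
  · rw [if_neg hshort, if_neg hshort]
    show pvItemBody rows cols bg k
        (PySem.List.sorted rlA (fun x => -(PySem.List.len x))) res =
      pvItemBody rows cols bg k
        (PySem.List.sorted rlB (fun x => -(PySem.List.len x))) res
    exact pvItemBody_congr rows cols bg k (pvSorted_rel h) res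

theorem pvGroupDict_rel (grid : List (List Int)) :
    ∀ {LA LB : List ((Int × Int) × List (Int × Int))},
      List.Forall₂ (fun eA eB => eA.1 = eB.1 ∧ eA.2.Perm eB.2) LA LB →
      pvDR (pvGroupDict grid LA) (pvGroupDict grid LB) := by
  suffices hgen : ∀ {LA LB : List ((Int × Int) × List (Int × Int))},
      List.Forall₂ (fun eA eB => eA.1 = eB.1 ∧ eA.2.Perm eB.2) LA LB →
      ∀ {d d' : PySem.Dict Int (List (List (Int × Int)))}, pvDR d d' →
      pvDR (LA.foldl (fun d e => pvGroupStep d (pvG grid e.1.1 e.1.2 0) e.2) d)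
        (LB.foldl (fun d e => pvGroupStep d (pvG grid e.1.1 e.1.2 0) e.2) d') by
    intro LA LB h
    exact hgen h (by unfold pvDR; exact List.Forall₂.nil)
  intro LA LB h
  induction h with
  | nil => exact fun hd => hd
  | @cons e e' t t' hR htail ih =>
    intro d d' hd
    simp only [List.foldl_cons]
    refine ih ?_
    rw [show pvG grid e.1.1 e.1.2 0 = pvG grid e'.1.1 e'.1.2 0 from by rw [hR.1]]
    exact pvDR_groupStep hd _ hR.2

theorem pvFold_items_congr (rows cols bg : Int) :
    ∀ {itsA itsB : List (Int × List (List (Int × Int)))},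
      List.Forall₂ (fun p p' => p.1 = p'.1 ∧ List.Forall₂ List.Perm p.2 p'.2) itsA itsB →
      ∀ res, itsA.foldl (fun res p => pvItemStep rows cols bg res p) res =
        itsB.foldl (fun res p => pvItemStep rows cols bg res p) res := by
  intro itsA itsB h
  induction h with
  | nil => exact fun _ => rfl
  | @cons p p' t t' hR htail ih =>
    intro res
    simp only [List.foldl_cons]
    have hstep : pvItemStep rows cols bg res p = pvItemStep rows cols bg res p' := by
      have e1 : pvItemStep rows cols bg res p =
        pvItemStep rows cols bg res (p.1, p.2) := rfl
      have e2 : pvItemStep rows cols bg res p' =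
        pvItemStep rows cols bg res (p'.1, p'.2) := rfl
      rw [e1, e2, hR.1]
      exact pvItemStep_congr rows cols bg res p'.1 hR.2
    rw [hstep]
    exact ih (pvItemStep rows cols bg res p')

theorem pv_main (grid : List (List Int)) : transform grid = transform_alt grid := by
  unfold transform transform_alt
  dsimp only
  have hrows : (0 : Int) ≤ PySem.List.len grid := by
    rw [PySem.List.len_eq]
    exact Int.natCast_nonneg _
  have hcols : (0 : Int) ≤ PySem.List.len (PySem.List.pyGetD grid 0 []) := by
    rw [PySem.List.len_eq]
    exact Int.natCast_nonneg _
  obtain ⟨LA, hdictA, hmapA, hpropsA⟩ := pvScanA_sem grid (PySem.List.len grid)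
    (PySem.List.len (PySem.List.pyGetD grid 0 []))
    ((PySem.List.pyGetD (PySem.List.sorted
      (PySem.Dict.counter (grid.foldl (fun acc row => acc ++ row) [])).items
      (fun p => -p.2)) 0 (0, 0)).1) hrows hcols
  rw [hdictA, pvGroupB_sem grid (PySem.List.len grid)
    (PySem.List.len (PySem.List.pyGetD grid 0 []))
    ((PySem.List.pyGetD (PySem.List.sorted
      (PySem.Dict.counter (grid.foldl (fun acc row => acc ++ row) [])).items
      (fun p => -p.2)) 0 (0, 0)).1) hrows hcols]
  rw [← hmapA, List.map_map]
  apply pvFold_items_congr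
  apply pvGroupDict_rel
  exact pvLA_rel grid (PySem.List.len grid)
    (PySem.List.len (PySem.List.pyGetD grid 0 []))
    ((PySem.List.pyGetD (PySem.List.sorted
      (PySem.Dict.counter (grid.foldl (fun acc row => acc ++ row) [])).items
      (fun p => -p.2)) 0 (0, 0)).1) hrows hcols LA hpropsA

-- ===== VERDICT (by name: the statement is the Claim_ definition above) =====
theorem transform_spec : Claim_equal_transform := by
  intro grid _ _
  unfold Spec_transform
  exact pv_main grid
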